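-- pv_equiv track=rewrite | github.com/thefoolgy/llm_study | cs336_basics/bpe.py | apply_merges
-- ===== SOURCE A (Python) =====
-- def apply_merges(word_bytes, merges_set, vocab_to_id):
--     word_bytes = list(word_bytes)
--
--     while True:
--         min_token_id = float('inf')
--         best_pair_idx = -1
--         merged = None
--
--         for i in range(len(word_bytes) - 1):
--             pair = (word_bytes[i], word_bytes[i + 1])
--             if pair in merges_set:
--                 combined = pair[0] + pair[1]
--                 token_id = vocab_to_id.get(combined)
--                 if token_id is not None and token_id < min_token_id:
--                     min_token_id = token_id
--                     best_pair_idx = i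
--                     merged = combined
--
--         if best_pair_idx == -1:
--             break
--
--         # Apply best merge
--         word_bytes = (
--             word_bytes[:best_pair_idx]
--             + [merged]
--             + word_bytes[best_pair_idx + 2:]
--         )
--
--     return tuple(word_bytes)
-- ===== SOURCE B (Python) =====
-- def apply_merges(word_bytes, merges_set, vocab_to_id):
--     # Linked-list + priority-agenda algorithm: build every mergeable adjacent
--     # pair once into an agenda kept sorted by (token_id, position); repeatedly
--     # pop the front entry, skip it if stale, otherwise merge in the linked
--     # list and push only the (at most two) new neighbour pairs.
--     tokens = list(word_bytes)
--     n = len(tokens)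
--     nxt = [i + 1 if i + 1 < n else -1 for i in range(n)]
--     prv = [i - 1 for i in range(n)]
--     alive = [True] * n
--
--     def entry(i, j):
--         a, b = tokens[i], tokens[j]
--         if (a, b) in merges_set:
--             tid = vocab_to_id.get(a + b)
--             if tid is not None:
--                 return (tid, i, a, b)
--         return None
--
--     def push(agenda, e):
--         k = 0
--         while k < len(agenda) and (agenda[k][0], agenda[k][1]) <= (e[0], e[1]):
--             k += 1
--         agenda.insert(k, e)
--
--     agenda = []
--     for i in range(n - 1):
--         e = entry(i, i + 1)
--         if e is not None:
--             push(agenda, e)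
--
--     while agenda:
--         tid, i, a, b = agenda.pop(0)
--         j = nxt[i]
--         if not alive[i] or j == -1 or tokens[i] != a or tokens[j] != b:
--             continue  # stale entry
--         tokens[i] = a + b
--         alive[j] = False
--         nxt[i] = nxt[j]
--         if nxt[j] != -1:
--             prv[nxt[j]] = i
--         p = prv[i]
--         if p != -1:
--             e = entry(p, i)
--             if e is not None:
--                 push(agenda, e)
--         if nxt[i] != -1:
--             e = entry(i, nxt[i])
--             if e is not None:
--                 push(agenda, e)
--
--     out = []
--     i = 0 if n > 0 else -1
--     while i != -1:
--         out.append(tokens[i])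
--         i = nxt[i]
--     return tuple(out)
-- ===== Notes on version B (the rewrite author's own statement) =====
-- stated objective: alternative
-- what changed: A rescans every adjacent pair of the whole word on every round to find the lowest-id merge and splices a fresh list; B builds all mergeable pairs once into an agenda kept sorted by (token_id, position) over a linked list (next/prev/alive arrays), then repeatedly pops the front entry, skips stale entries, merges in O(1) and re-examines only the two neighbour pairs of the merged node.
import Mathlib
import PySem

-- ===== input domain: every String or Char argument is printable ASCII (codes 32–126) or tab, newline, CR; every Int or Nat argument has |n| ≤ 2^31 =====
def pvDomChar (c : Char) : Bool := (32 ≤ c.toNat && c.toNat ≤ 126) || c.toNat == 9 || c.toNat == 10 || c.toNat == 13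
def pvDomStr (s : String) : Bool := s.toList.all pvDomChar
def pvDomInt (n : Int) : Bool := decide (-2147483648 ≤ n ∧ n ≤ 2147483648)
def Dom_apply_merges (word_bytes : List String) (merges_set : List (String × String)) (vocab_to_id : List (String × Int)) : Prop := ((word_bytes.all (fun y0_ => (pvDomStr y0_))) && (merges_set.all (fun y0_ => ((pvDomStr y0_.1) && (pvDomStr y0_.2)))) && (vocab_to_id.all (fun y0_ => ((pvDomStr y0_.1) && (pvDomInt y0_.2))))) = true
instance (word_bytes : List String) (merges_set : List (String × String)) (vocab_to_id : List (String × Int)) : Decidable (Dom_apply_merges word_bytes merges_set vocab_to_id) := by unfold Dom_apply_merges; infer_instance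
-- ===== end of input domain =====

-- B replaces A's repeated whole-word rescan (argmin over every adjacent pair, every round) by a
-- linked list over the word plus an agenda of candidate merges kept sorted by (token_id, position):
-- each merge pops the front entry, skips stale entries, and re-examines only the two neighbour
-- pairs of the merged node (objective: alternative — a genuinely different data structure, same cost).

-- ===== PORT A =====
-- One iteration of A's inner `for i in range(len(word_bytes) - 1)` loop.
-- `min_token_id = float('inf')` is modelled as `none` (the comparison `token_id < inf` is then `true`);
-- `word_bytes[i]` is always in range here, so `pyGetD` with a dummy default is exact.
def pvAStep (ws : List String) (merges_set : List (String × String)) (vocab_to_id : List (String × Int))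
    (st : Option Int × Int × Option String) (i : Int) : Option Int × Int × Option String :=
  let a := PySem.List.pyGetD ws i ""
  let b := PySem.List.pyGetD ws (i + 1) ""
  if PySem.Set.contains merges_set (a, b) then
    let combined := a ++ b
    match PySem.Dict.get? (PySem.Dict.mk vocab_to_id) combined with
    | some token_id =>
        if (match st.1 with | none => true | some m => decide (token_id < m)) then
          (some token_id, i, some combined)
        else st
    | none => st
  else st

-- A's `while True` loop; the fuel `word_bytes.length + 1` strictly exceeds the number of
-- iterations A can perform (each merge shortens the list by one), so the port is exact.
def pvALoop (merges_set : List (String × String)) (vocab_to_id : List (String × Int)) :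
    Nat → List String → List String
  | 0, ws => ws
  | fuel + 1, ws =>
    let st := (PySem.List.pyRange 0 (PySem.List.len ws - 1) 1).foldl
                (pvAStep ws merges_set vocab_to_id) (none, -1, none)
    if st.2.1 = -1 then ws
    else
      pvALoop merges_set vocab_to_id fuel
        (PySem.List.slice ws none (some st.2.1) ++ [st.2.2.getD ""] ++
          PySem.List.slice ws (some (st.2.1 + 2)) none)

def apply_merges (word_bytes : List String) (merges_set : List (String × String)) (vocab_to_id : List (String × Int)) : List String :=
  pvALoop merges_set vocab_to_id (word_bytes.length + 1) word_bytes

-- ===== PORT B =====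
-- An agenda entry (token_id, position, left token, right token), as in Source B.
-- Source B's helper `entry(i, j)` (indices i, j are always in range; `pyGetD` with a dummy default is exact).
def pvEntry? (merges_set : List (String × String)) (vocab_to_id : List (String × Int))
    (tokens : List String) (i j : Int) : Option (Int × Int × String × String) :=
  let a := PySem.List.pyGetD tokens i ""
  let b := PySem.List.pyGetD tokens j ""
  if PySem.Set.contains merges_set (a, b) then
    match PySem.Dict.get? (PySem.Dict.mk vocab_to_id) (a ++ b) with
    | some tid => some (tid, i, a, b)
    | none => none
  else none

-- Source B's `push`: scan for the first position whose key (id, pos) exceeds e's and insert there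
-- (the index loop becomes the standard structural recursion over the scanned prefix).
def pvPush (agenda : List (Int × Int × String × String)) (e : Int × Int × String × String) :
    List (Int × Int × String × String) :=
  match agenda with
  | [] => [e]
  | x :: rest =>
    if x.1 < e.1 ∨ (x.1 = e.1 ∧ x.2.1 ≤ e.2.1) then x :: pvPush rest e else e :: x :: rest

-- Source B's `while agenda` loop, state-passed; fuel 3n+3 strictly exceeds the number of pops
-- (≤ n-1 initial entries + 2 pushes per merge, ≤ n-1 merges), so the port is exact.
def pvBLoop (ms : List (String × String)) (v : List (String × Int)) :
    Nat → List String → List Int → List Int → List Bool →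
    List (Int × Int × String × String) → List String × List Int
  | 0, tokens, nxt, _, _, _ => (tokens, nxt)
  | fuel + 1, tokens, nxt, prv, alive, agenda =>
    match agenda with
    | [] => (tokens, nxt)
    | (_tid, i, a, b) :: rest =>
      let j := PySem.List.pyGetD nxt i (-1)
      if PySem.List.pyGetD alive i false = false ∨ j = -1 ∨
         PySem.List.pyGetD tokens i "" ≠ a ∨ PySem.List.pyGetD tokens j "" ≠ b then
        pvBLoop ms v fuel tokens nxt prv alive rest   -- stale entry
      else
        let tokens' := PySem.List.pySetD tokens i (a ++ b)
        let alive' := PySem.List.pySetD alive j false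
        let nj := PySem.List.pyGetD nxt j (-1)
        let nxt' := PySem.List.pySetD nxt i nj
        let prv' := if nj ≠ -1 then PySem.List.pySetD prv nj i else prv
        let p := PySem.List.pyGetD prv' i (-1)
        let ag1 := if p ≠ -1 then
            (match pvEntry? ms v tokens' p i with | some e => pvPush rest e | none => rest)
          else rest
        let ag2 := if nj ≠ -1 then
            (match pvEntry? ms v tokens' i nj with | some e => pvPush ag1 e | none => ag1)
          else ag1
        pvBLoop ms v fuel tokens' nxt' prv' alive' ag2

-- Source B's final walk along the linked list; fuel n+1 strictly exceeds the chain length.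
def pvWalk (tokens : List String) (nxt : List Int) : Nat → Int → List String
  | 0, _ => []
  | fuel + 1, i =>
    if i = -1 then []
    else PySem.List.pyGetD tokens i "" :: pvWalk tokens nxt fuel (PySem.List.pyGetD nxt i (-1))

def apply_merges_alt (word_bytes : List String) (merges_set : List (String × String)) (vocab_to_id : List (String × Int)) : List String :=
  let tokens := word_bytes
  let n := word_bytes.length
  let nxt := (PySem.List.pyRange 0 n 1).map (fun i => if i + 1 < (n : Int) then i + 1 else -1)
  let prv := (PySem.List.pyRange 0 n 1).map (fun i => i - 1)
  let alive := List.replicate n true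
  let agenda := (PySem.List.pyRange 0 ((n : Int) - 1) 1).foldl
    (fun ag i => match pvEntry? merges_set vocab_to_id tokens i (i + 1) with
                 | some e => pvPush ag e
                 | none => ag) []
  let res := pvBLoop merges_set vocab_to_id (3 * n + 3) tokens nxt prv alive agenda
  pvWalk res.1 res.2 (n + 1) (if 0 < n then 0 else -1)

-- ===== PRECONDITION & SPEC =====
def Spec_apply_merges (word_bytes : List String) (merges_set : List (String × String)) (vocab_to_id : List (String × Int)) (out : List String) : Prop := out = apply_merges_alt word_bytes merges_set vocab_to_id
instance (word_bytes : List String) (merges_set : List (String × String)) (vocab_to_id : List (String × Int)) (out : List String) : Decidable (Spec_apply_merges word_bytes merges_set vocab_to_id out) := by unfold Spec_apply_merges; infer_instance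

-- ===== CLAIM (what is proved, stated in full; the proofs are below) =====
def Claim_equal_apply_merges : Prop := ∀ (word_bytes : List String) (merges_set : List (String × String)) (vocab_to_id : List (String × Int)), Dom_apply_merges word_bytes merges_set vocab_to_id → Spec_apply_merges word_bytes merges_set vocab_to_id (apply_merges word_bytes merges_set vocab_to_id)

-- ===== LEMMAS AND PROOFS =====


-- ---------- A-side analysis: one round of A is an argmin over a candidate list ----------

-- The candidate an index i of A's scan contributes, if any.
def pvCandOf (ws : List String) (merges_set : List (String × String)) (vocab_to_id : List (String × Int)) (i : Int) : Option (Int × Int) :=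
  let a := PySem.List.pyGetD ws i ""
  let b := PySem.List.pyGetD ws (i + 1) ""
  if PySem.Set.contains merges_set (a, b) then
    match PySem.Dict.get? (PySem.Dict.mk vocab_to_id) (a ++ b) with
    | some t => some (t, i)
    | none => none
  else none

def pvACands (ms : List (String × String)) (v : List (String × Int)) (ws : List String) : List (Int × Int) :=
  (PySem.List.pyRange 0 (PySem.List.len ws - 1) 1).filterMap (pvCandOf ws ms v)

-- A's scan state as a function of the running first-minimum of the candidates seen so far.
def pvEncode (ws : List String) : Option (Int × Int) → Option Int × Int × Option String
  | none => (none, -1, none)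
  | some c => (some c.1, c.2, some (PySem.List.pyGetD ws c.2 "" ++ PySem.List.pyGetD ws (c.2 + 1) ""))

-- The running-minimum step of A's scan.
def pvMinStep (acc : Option (Int × Int)) (c : Int × Int) : Option (Int × Int) :=
  match acc with
  | none => some c
  | some m => if c.1 < m.1 then some c else some m

theorem pvAStep_encode (ws : List String) (ms : List (String × String)) (v : List (String × Int))
    (acc : Option (Int × Int)) (i : Int) :
    pvAStep ws ms v (pvEncode ws acc) i =
      pvEncode ws ((pvCandOf ws ms v i).elim acc (pvMinStep acc)) := by
  simp only [pvAStep, pvCandOf]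
  split
  · split
    · rename_i t _
      cases acc with
      | none => simp [pvEncode, pvMinStep]
      | some m =>
        by_cases hlt : t < m.1
        · simp [pvEncode, pvMinStep, hlt]
        · simp [pvEncode, pvMinStep, hlt]
    · cases acc <;> simp [pvEncode]
  · cases acc <;> simp [pvEncode]

theorem pvFold_encode (ws : List String) (ms : List (String × String)) (v : List (String × Int))
    (l : List Int) (acc : Option (Int × Int)) :
    l.foldl (pvAStep ws ms v) (pvEncode ws acc) =
      pvEncode ws ((l.filterMap (pvCandOf ws ms v)).foldl pvMinStep acc) := by
  induction l generalizing acc with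
  | nil => rfl
  | cons i l ih =>
    rw [List.foldl_cons, pvAStep_encode, List.filterMap_cons]
    cases hc : pvCandOf ws ms v i with
    | none => simpa [hc] using ih acc
    | some c => simpa [hc] using ih (pvMinStep acc c)

theorem pvFoldMin_mem : ∀ (l : List (Int × Int)) (acc : Option (Int × Int)) (c : Int × Int),
    l.foldl pvMinStep acc = some c → c ∈ l ∨ acc = some c := by
  intro l
  induction l with
  | nil => intro acc c h; exact Or.inr h
  | cons x t ih =>
    intro acc c h
    rcases ih (pvMinStep acc x) c h with hm | he
    · exact Or.inl (List.mem_cons_of_mem _ hm)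
    · cases acc with
      | none => cases he; exact Or.inl List.mem_cons_self
      | some m =>
        simp only [pvMinStep] at he
        split at he
        · cases he; exact Or.inl List.mem_cons_self
        · exact Or.inr he

theorem pvCand_mem_nonneg (ms : List (String × String)) (v : List (String × Int)) (ws : List String)
    (c : Int × Int) (hc : c ∈ pvACands ms v ws) :
    0 ≤ c.2 ∧ (c.2 : Int) < PySem.List.len ws - 1 ∧ pvCandOf ws ms v c.2 = some c := by
  rcases List.mem_filterMap.1 hc with ⟨j, hj, hcand⟩
  have hj' := (PySem.List.mem_pyRange_one).1 hj
  have hjc : c.2 = j := by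
    simp only [pvCandOf] at hcand
    split at hcand
    · split at hcand
      · cases hcand; rfl
      · exact absurd hcand (by simp)
    · exact absurd hcand (by simp)
  exact ⟨hjc ▸ hj'.1, hjc ▸ hj'.2, hjc ▸ hcand⟩

-- A's round, packaged: the scan is the first-minimum of the candidate list.
theorem pvARound (ms : List (String × String)) (v : List (String × Int)) (fuel : Nat) (ws : List String) :
    pvALoop ms v (fuel + 1) ws =
      match (pvACands ms v ws).foldl pvMinStep none with
      | none => ws
      | some c =>
          pvALoop ms v fuel
            (PySem.List.slice ws none (some c.2) ++
              [PySem.List.pyGetD ws c.2 "" ++ PySem.List.pyGetD ws (c.2 + 1) ""] ++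
              PySem.List.slice ws (some (c.2 + 2)) none) := by
  have hfold : (PySem.List.pyRange 0 (PySem.List.len ws - 1) 1).foldl
      (pvAStep ws ms v) (none, -1, none)
      = pvEncode ws ((pvACands ms v ws).foldl pvMinStep none) := by
    have := pvFold_encode ws ms v (PySem.List.pyRange 0 (PySem.List.len ws - 1) 1) none
    simpa [pvACands, pvEncode] using this
  have ha : pvALoop ms v (fuel + 1) ws =
      (let st := (PySem.List.pyRange 0 (PySem.List.len ws - 1) 1).foldl
                   (pvAStep ws ms v) (none, -1, none)
       if st.2.1 = -1 then ws
       else pvALoop ms v fuel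
         (PySem.List.slice ws none (some st.2.1) ++ [st.2.2.getD ""] ++
           PySem.List.slice ws (some (st.2.1 + 2)) none)) := rfl
  rw [ha, hfold]
  cases hmin : (pvACands ms v ws).foldl pvMinStep none with
  | none => simp [pvEncode]
  | some c =>
    have hmem : c ∈ pvACands ms v ws := by
      rcases pvFoldMin_mem _ _ _ hmin with h | h
      · exact h
      · cases h
    have h0 : 0 ≤ c.2 := (pvCand_mem_nonneg ms v ws c hmem).1
    have hne : ¬ (c.2 = -1) := by omega
    simp only [pvEncode, hne, if_false, Option.getD_some]

-- lexicographic strict order on (id, position) keys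
def pvLexLt (m x : Int × Int) : Prop := m.1 < x.1 ∨ (m.1 = x.1 ∧ m.2 < x.2)

theorem pvFoldS : ∀ (rest : List (Int × Int)) (acc m : Int × Int),
    (∀ x ∈ rest, acc.2 < x.2) → rest.Pairwise (fun a b => a.2 < b.2) →
    (m = acc ∨ m ∈ rest) →
    (∀ x, (x = acc ∨ x ∈ rest) → x ≠ m → pvLexLt m x) →
    rest.foldl pvMinStep (some acc) = some m := by
  intro rest
  induction rest with
  | nil =>
    intro acc m _ _ hmem hmin
    rcases hmem with h | h
    · simp [h]
    · cases h
  | cons h t ih =>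
    intro acc m hacc hpw hmem hmin
    rw [List.foldl_cons]
    rcases List.pairwise_cons.1 hpw with ⟨hht, hpt⟩
    by_cases hlt : h.1 < acc.1
    · -- step keeps h
      have hstep : pvMinStep (some acc) h = some h := by simp [pvMinStep, hlt]
      rw [hstep]
      apply ih h m (fun x hx => hht x hx) hpt
      · rcases hmem with rfl | hm
        · by_cases he : h = m
          · exact Or.inl he.symm
          · rcases hmin h (Or.inr List.mem_cons_self) he with h1 | ⟨h1, h2⟩ <;> omega
        · rcases List.mem_cons.1 hm with rfl | hm'
          · exact Or.inl rfl
          · exact Or.inr hm'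
      · intro x hx hxm
        apply hmin x _ hxm
        rcases hx with rfl | hx'
        · exact Or.inr List.mem_cons_self
        · exact Or.inr (List.mem_cons_of_mem _ hx')
    · -- step keeps acc
      have hstep : pvMinStep (some acc) h = some acc := by simp [pvMinStep, hlt]
      rw [hstep]
      have hhm : h ≠ m := by
        intro he
        have h2 : acc.2 < h.2 := hacc _ List.mem_cons_self
        have hane : acc ≠ m := by
          intro hae
          rw [hae, ← he] at h2
          exact lt_irrefl _ h2
        rcases hmin acc (Or.inl rfl) hane with h1 | ⟨h1, hlt2⟩
        · rw [← he] at h1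
          exact hlt h1
        · rw [← he] at hlt2
          omega
      apply ih acc m (fun x hx => hacc x (List.mem_cons_of_mem _ hx)) hpt
      · rcases hmem with rfl | hm
        · exact Or.inl rfl
        · rcases List.mem_cons.1 hm with rfl | hm'
          · exact absurd rfl hhm
          · exact Or.inr hm'
      · intro x hx hxm
        apply hmin x _ hxm
        rcases hx with rfl | hx'
        · exact Or.inl rfl
        · exact Or.inr (List.mem_cons_of_mem _ hx')

theorem pvFoldMin_eq (l : List (Int × Int)) (m : Int × Int)
    (hpw : l.Pairwise (fun a b => a.2 < b.2)) (hm : m ∈ l)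
    (hmin : ∀ x ∈ l, x ≠ m → pvLexLt m x) :
    l.foldl pvMinStep none = some m := by
  cases l with
  | nil => cases hm
  | cons h t =>
    rw [List.foldl_cons]
    have hstep : pvMinStep none h = some h := rfl
    rw [hstep]
    rcases List.pairwise_cons.1 hpw with ⟨hht, hpt⟩
    apply pvFoldS t h m hht hpt
    · rcases List.mem_cons.1 hm with rfl | hm'
      · exact Or.inl rfl
      · exact Or.inr hm'
    · intro x hx hxm
      apply hmin x _ hxm
      rcases hx with rfl | hx'
      · exact List.mem_cons_self
      · exact List.mem_cons_of_mem _ hx'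

-- candidates are listed in strictly increasing position order
theorem pvACands_pairwise (ms : List (String × String)) (v : List (String × Int)) (ws : List String) :
    (pvACands ms v ws).Pairwise (fun a b => a.2 < b.2) := by
  apply List.Pairwise.filterMap (R := fun (a b : Int) => a < b) (pvCandOf ws ms v)
    ?_ (PySem.List.pairwise_lt_pyRange_one 0 (PySem.List.len ws - 1))
  · intro a b hab ca hca cb hcb
    have ha : ca.2 = a := by
      simp only [pvCandOf] at hca
      split at hca
      · split at hca
        · cases hca; rfl
        · exact absurd hca (by simp)
      · exact absurd hca (by simp)
    have hb : cb.2 = b := by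
      simp only [pvCandOf] at hcb
      split at hcb
      · split at hcb
        · cases hcb; rfl
        · exact absurd hcb (by simp)
      · exact absurd hcb (by simp)
    rw [ha, hb]; exact hab

-- ---------- push lemmas ----------

def pvKeyLE (x y : Int × Int × String × String) : Prop :=
  x.1 < y.1 ∨ (x.1 = y.1 ∧ x.2.1 ≤ y.2.1)

theorem pvPush_mem (l : List (Int × Int × String × String)) (e x : Int × Int × String × String) :
    x ∈ pvPush l e ↔ x = e ∨ x ∈ l := by
  induction l with
  | nil => simp [pvPush]
  | cons h t ih =>
    simp only [pvPush]
    split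
    · simp only [List.mem_cons, ih]
      tauto
    · simp only [List.mem_cons]

theorem pvPush_length (l : List (Int × Int × String × String)) (e : Int × Int × String × String) :
    (pvPush l e).length = l.length + 1 := by
  induction l with
  | nil => rfl
  | cons h t ih =>
    simp only [pvPush]
    split
    · simp [ih]
    · simp

theorem pvPush_pairwise (l : List (Int × Int × String × String)) (e : Int × Int × String × String)
    (h : l.Pairwise pvKeyLE) : (pvPush l e).Pairwise pvKeyLE := by
  induction l with
  | nil => simp [pvPush, List.pairwise_cons]
  | cons x t ih =>
    rcases List.pairwise_cons.1 h with ⟨hxt, hpt⟩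
    simp only [pvPush]
    split
    · rename_i hle
      apply List.pairwise_cons.2
      constructor
      · intro y hy
        rcases (pvPush_mem t e y).1 hy with rfl | hyt
        · rcases hle with h1 | ⟨h1, h2⟩
          · exact Or.inl h1
          · exact Or.inr ⟨h1, h2⟩
        · exact hxt y hyt
      · exact ih hpt
    · rename_i hnle
      apply List.pairwise_cons.2
      constructor
      · intro y hy
        rcases List.mem_cons.1 hy with rfl | hyt
        · unfold pvKeyLE
          push Not at hnle
          rcases hnle with ⟨h1, h2⟩
          rcases lt_trichotomy e.1 y.1 with h | h | h
          · exact Or.inl h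
          · refine Or.inr ⟨h, ?_⟩
            have := h2 h.symm
            omega
          · omega
        · have hxy := hxt y hyt
          unfold pvKeyLE at hxy ⊢
          push Not at hnle
          rcases hnle with ⟨h1, h2⟩
          rcases hxy with hx1 | ⟨hx1, hx2⟩
          · rcases lt_trichotomy e.1 y.1 with h | h | h
            · exact Or.inl h
            · refine Or.inr ⟨h, ?_⟩
              omega
            · omega
          · rcases lt_trichotomy e.1 y.1 with h | h | h
            · exact Or.inl h
            · refine Or.inr ⟨h, ?_⟩
              have := h2 (by omega)
              omega
            · omega
      · exact h

-- ---------- adjacency in the abstract chain ----------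

def pvAdj {α : Type} (L : List α) (x y : α) : Prop :=
  ∃ k : Nat, L[k]? = some x ∧ L[k + 1]? = some y


theorem pvAdj_append_left {α : Type} (P T : List α) (x y : α) (h : pvAdj P x y) :
    pvAdj (P ++ T) x y := by
  rcases h with ⟨k, h1, h2⟩
  have hk : k + 1 < P.length := (List.getElem?_eq_some_iff.1 h2).1
  exact ⟨k, by rw [List.getElem?_append_left (by omega)]; exact h1,
            by rw [List.getElem?_append_left hk]; exact h2⟩

theorem pvAdj_append_right {α : Type} (T S : List α) (x y : α) (h : pvAdj S x y) :
    pvAdj (T ++ S) x y := by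
  rcases h with ⟨k, h1, h2⟩
  refine ⟨T.length + k, ?_, ?_⟩
  · rw [List.getElem?_append_right (by omega)]
    simpa using h1
  · rw [List.getElem?_append_right (by omega)]
    have : T.length + k + 1 - T.length = k + 1 := by omega
    rw [this]; exact h2

theorem pvAdj_boundary_left {α : Type} (P S : List α) (m x : α) (h : P.getLast? = some x) :
    pvAdj (P ++ m :: S) x m := by
  rcases List.getLast?_eq_some_iff.1 h with ⟨P', rfl⟩
  refine ⟨P'.length, ?_, ?_⟩
  · rw [List.append_assoc]
    rw [List.getElem?_append_right (by simp)]
    simp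
  · rw [List.append_assoc]
    rw [List.getElem?_append_right (by simp)]
    simp

theorem pvAdj_boundary_right {α : Type} (P S : List α) (m y : α) (h : S.head? = some y) :
    pvAdj (P ++ m :: S) m y := by
  rcases S with _ | ⟨z, S'⟩
  · cases h
  · cases h
    refine ⟨P.length, ?_, ?_⟩
    · rw [List.getElem?_append_right (by omega)]
      simp
    · rw [List.getElem?_append_right (by omega)]
      have : P.length + 1 - P.length = 1 := by omega
      rw [this]
      simp

theorem pvAdj_cases {α : Type} (P S : List α) (m x y : α) (h : pvAdj (P ++ m :: S) x y) :
    pvAdj P x y ∨ (P.getLast? = some x ∧ y = m) ∨ (x = m ∧ S.head? = some y) ∨ pvAdj S x y := by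
  rcases h with ⟨k, h1, h2⟩
  have hlen : k + 1 < P.length + (m :: S).length := by
    have := (List.getElem?_eq_some_iff.1 h2).1
    simpa using this
  by_cases hk1 : k + 1 < P.length
  · left
    exact ⟨k, by rw [List.getElem?_append_left (by omega)] at h1; exact h1,
              by rw [List.getElem?_append_left hk1] at h2; exact h2⟩
  · by_cases hk2 : k + 1 = P.length
    · right; left
      constructor
      · rw [List.getElem?_append_left (by omega)] at h1
        rw [List.getLast?_eq_getElem?]
        rw [← hk2]
        have : k + 1 - 1 = k := by omega
        rw [this]; exact h1
      · rw [List.getElem?_append_right (by omega)] at h2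
        rw [hk2] at h2
        simp at h2
        exact h2.symm
    · by_cases hk3 : k = P.length
      · right; right; left
        constructor
        · rw [List.getElem?_append_right (by omega)] at h1
          rw [hk3] at h1
          simp at h1
          exact h1.symm
        · rw [List.getElem?_append_right (by omega)] at h2
          rw [hk3] at h2
          have : P.length + 1 - P.length = 1 := by omega
          rw [this] at h2
          simp at h2
          rcases S with _ | ⟨z, S'⟩
          · simp at h2
          · simp at h2
            simp [h2]
      · right; right; right
        have hgt : P.length < k := by omega
        refine ⟨k - P.length - 1, ?_, ?_⟩
        · rw [List.getElem?_append_right (by omega)] at h1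
          have : k - P.length = (k - P.length - 1) + 1 := by omega
          rw [this] at h1
          simpa using h1
        · rw [List.getElem?_append_right (by omega)] at h2
          have : k + 1 - P.length = (k - P.length - 1 + 1) + 1 := by omega
          rw [this] at h2
          simpa using h2

theorem pvAdj_mem_left {α : Type} {L : List α} {x y : α} (h : pvAdj L x y) : x ∈ L := by
  rcases h with ⟨k, h1, _⟩
  exact List.mem_of_getElem? h1

theorem pvAdj_mem_right {α : Type} {L : List α} {x y : α} (h : pvAdj L x y) : y ∈ L := by
  rcases h with ⟨k, _, h2⟩
  exact List.mem_of_getElem? h2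

theorem pvAdj_cons {α : Type} (z : α) (L : List α) (x y : α) (h : pvAdj L x y) :
    pvAdj (z :: L) x y := pvAdj_append_right [z] L x y h

-- ---------- read/write helpers (all indices used are nonnegative and in range) ----------

theorem pvGetD_nonneg_eq {α : Type} (xs : List α) (i : Int) (d : α) (h : 0 ≤ i) :
    PySem.List.pyGetD xs i d = xs.getD i.toNat d := by
  obtain ⟨k, rfl⟩ : ∃ k : Nat, i = (k : Int) := ⟨i.toNat, by omega⟩
  simp [PySem.List.pyGetD_natCast]

theorem pvGetSet {α : Type} (xs : List α) (wr i : Int) (v d : α)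
    (hw0 : 0 ≤ wr) (hwl : wr < xs.length) (hi : 0 ≤ i) :
    PySem.List.pyGetD (PySem.List.pySetD xs wr v) i d =
      if i = wr then v else PySem.List.pyGetD xs i d := by
  rw [PySem.List.pySetD_of_nonneg _ _ hw0, pvGetD_nonneg_eq _ _ _ hi, pvGetD_nonneg_eq _ _ _ hi]
  by_cases he : i = wr
  · subst he
    rw [if_pos rfl]
    rw [List.getD_eq_getElem (xs.set i.toNat v) d (n := i.toNat) (by simp; omega)]
    exact List.getElem_set_self (by simp; omega)
  · rw [if_neg he]
    by_cases hlt : i.toNat < xs.length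
    · rw [List.getD_eq_getElem (xs.set wr.toNat v) d (n := i.toNat) (by simp; omega),
          List.getD_eq_getElem xs d (n := i.toNat) (by omega)]
      exact List.getElem_set_ne (by omega) (by simp; omega)
    · rw [List.getD_eq_default (xs.set wr.toNat v) d (n := i.toNat) (by simp; omega),
          List.getD_eq_default xs d (n := i.toNat) (by omega)]

theorem pvLength_pySetD {α : Type} (xs : List α) (wr : Int) (v : α) (h : 0 ≤ wr) :
    (PySem.List.pySetD xs wr v).length = xs.length := by
  rw [PySem.List.pySetD_of_nonneg _ _ h]
  simp

-- ---------- the final walk reads off the chain ----------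

theorem pvWalk_eq (tokens : List String) (nxt : List Int) :
    ∀ (L : List (Int × String)) (fuel : Nat) (s : Int),
    (∀ x ∈ L, PySem.List.pyGetD tokens x.1 "" = x.2) →
    (∀ x ∈ L, 0 ≤ x.1) →
    (∀ x y, pvAdj L x y → PySem.List.pyGetD nxt x.1 (-1) = y.1) →
    (∀ x, L.getLast? = some x → PySem.List.pyGetD nxt x.1 (-1) = -1) →
    (L = [] → s = -1) →
    (∀ x T, L = x :: T → s = x.1) →
    L.length < fuel →
    pvWalk tokens nxt fuel s = L.map Prod.snd := by
  intro L
  induction L with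
  | nil =>
    intro fuel s _ _ _ _ hnil _ hf
    rcases fuel with _ | f
    · omega
    · simp [pvWalk, hnil rfl]
  | cons x T ih =>
    intro fuel s htok hpos hadj hlast hnil hhead hf
    rcases fuel with _ | f
    · omega
    have hs : s = x.1 := hhead x T rfl
    have hsne : ¬ (s = -1) := by
      have := hpos x List.mem_cons_self
      omega
    show (if s = -1 then [] else PySem.List.pyGetD tokens s "" :: pvWalk tokens nxt f (PySem.List.pyGetD nxt s (-1))) = _
    rw [if_neg hsne, hs]
    rw [htok x List.mem_cons_self]
    congr 1
    rcases T with _ | ⟨y, T'⟩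
    · have hn : PySem.List.pyGetD nxt x.1 (-1) = -1 := hlast x rfl
      rw [hn]
      exact ih f (-1) (fun _ h => absurd h (by simp)) (fun _ h => absurd h (by simp))
        (fun _ _ h => absurd h (by rintro ⟨k, h1, _⟩; simp at h1))
        (fun _ h => absurd h (by simp)) (fun _ => rfl)
        (fun _ _ h => absurd h (by simp)) (by simp at hf ⊢; omega)
    · have hn : PySem.List.pyGetD nxt x.1 (-1) = y.1 := by
        apply hadj x y
        exact ⟨0, rfl, rfl⟩
      rw [hn]
      apply ih f y.1
      · exact fun z hz => htok z (List.mem_cons_of_mem _ hz)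
      · exact fun z hz => hpos z (List.mem_cons_of_mem _ hz)
      · exact fun z w h => hadj z w (pvAdj_cons x _ z w h)
      · intro z hz
        apply hlast
        rw [List.getLast?_cons, hz]
        simp
      · intro h; cases h
      · intro z T2 h
        cases h
        rfl
      · simp at hf ⊢; omega

-- ---------- the loop invariant ----------

structure pvInv (ms : List (String × String)) (v : List (String × Int)) (n : Nat)
    (tokens : List String) (nxt prv : List Int) (alive : List Bool)
    (agenda : List (Int × Int × String × String)) (L : List (Int × String)) : Prop where
  lenTok : tokens.length = n
  lenNxt : nxt.length = n
  lenPrv : prv.length = n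
  lenAlive : alive.length = n
  mono : (L.map Prod.fst).Pairwise (· < ·)
  bounds : ∀ x ∈ L, 0 ≤ x.1 ∧ x.1 < (n : Int)
  head0 : ∀ x T, L = x :: T → x.1 = 0
  nonnil : 0 < n → L ≠ []
  tok : ∀ x ∈ L, PySem.List.pyGetD tokens x.1 "" = x.2
  aliveIff : ∀ idx : Int, 0 ≤ idx → idx < (n : Int) →
    (PySem.List.pyGetD alive idx false = true ↔ idx ∈ L.map Prod.fst)
  linkNxt : ∀ x y, pvAdj L x y → PySem.List.pyGetD nxt x.1 (-1) = y.1
  lastNxt : ∀ x, L.getLast? = some x → PySem.List.pyGetD nxt x.1 (-1) = -1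
  linkPrv : ∀ x y, pvAdj L x y → PySem.List.pyGetD prv y.1 (-1) = x.1
  headPrv : ∀ x T, L = x :: T → PySem.List.pyGetD prv x.1 (-1) = -1
  agSorted : agenda.Pairwise pvKeyLE
  agOK : ∀ e ∈ agenda, PySem.Set.contains ms (e.2.2.1, e.2.2.2) = true ∧
    PySem.Dict.get? (PySem.Dict.mk v) (e.2.2.1 ++ e.2.2.2) = some e.1 ∧
    0 ≤ e.2.1 ∧ e.2.1 < (n : Int)
  agComplete : ∀ x y, pvAdj L x y → ∀ t,
    PySem.Set.contains ms (x.2, y.2) = true →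
    PySem.Dict.get? (PySem.Dict.mk v) (x.2 ++ y.2) = some t →
    (t, x.1, x.2, y.2) ∈ agenda

-- a strictly increasing list of ints in [0, n) has at most n elements
theorem pvChain_length_le (l : List Int) (n : Nat)
    (hpw : l.Pairwise (· < ·)) (hb : ∀ x ∈ l, 0 ≤ x ∧ x < (n : Int)) : l.length ≤ n := by
  have hnd : l.Nodup := hpw.imp (fun h => ne_of_lt h)
  have : l.toFinset.card = l.length := List.toFinset_card_of_nodup hnd
  rw [← this]
  have hsub : l.toFinset ⊆ Finset.Ico (0 : Int) n := by
    intro x hx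
    rw [List.mem_toFinset] at hx
    rcases hb x hx with ⟨h1, h2⟩
    rw [Finset.mem_Ico]
    exact ⟨h1, h2⟩
  calc l.toFinset.card ≤ (Finset.Ico (0 : Int) n).card := Finset.card_le_card hsub
    _ = n := by simp


-- ---------- splitting the chain ----------

theorem pvSplitMono (P S : List (Int × String)) (x y : Int × String)
    (h : (((P ++ x :: y :: S).map Prod.fst)).Pairwise (· < ·)) :
    (∀ p ∈ P, p.1 < x.1) ∧ x.1 < y.1 ∧ (∀ s ∈ S, y.1 < s.1) ∧ (∀ p ∈ P, ∀ s ∈ S, p.1 < s.1) := by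
  rw [List.map_append, List.pairwise_append] at h
  rcases h with ⟨hP, hxys, hcross⟩
  simp only [List.map_cons, List.pairwise_cons] at hxys
  rcases hxys with ⟨hx, hy, hS⟩
  refine ⟨?_, ?_, ?_, ?_⟩
  · intro p hp
    exact hcross p.1 (List.mem_map_of_mem hp) x.1 (by simp)
  · exact hx y.1 (by simp)
  · intro s hs
    exact hy s.1 (List.mem_map_of_mem hs)
  · intro p hp s hs
    exact hcross p.1 (List.mem_map_of_mem hp) s.1 (by simp [List.mem_map_of_mem hs])

theorem pvMemSplit {α : Type} (L : List α) (x : α) (h : x ∈ L) :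
    ∃ P S, L = P ++ x :: S := by
  rcases List.append_of_mem h with ⟨P, S, rfl⟩
  exact ⟨P, S, rfl⟩

-- the adjacent pair at list position k
theorem pvPosSplit {α : Type} (L : List α) (k : Nat) (h : k + 1 < L.length) :
    ∃ P x y S, L = P ++ x :: y :: S ∧ P.length = k := by
  refine ⟨L.take k, L[k], L[k+1], L.drop (k+2), ?_, List.length_take_of_le (by omega)⟩
  have h1 : L.drop k = L[k] :: L.drop (k+1) := List.drop_eq_getElem_cons (by omega)
  have h2 : L.drop (k+1) = L[k+1] :: L.drop (k+2) := List.drop_eq_getElem_cons (by omega)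
  conv_lhs => rw [← List.take_append_drop k L, h1, h2]

-- reading the word at a position of the chain
theorem pvWsGet (P S : List (Int × String)) (x : Int × String) (d : String) :
    PySem.List.pyGetD ((P ++ x :: S).map Prod.snd) (P.length : Int) d = x.2 := by
  rw [PySem.List.pyGetD_natCast]
  rw [List.getD_eq_getElem _ _ (n := P.length) (by simp)]
  simp

theorem pvWsGetSucc (P S : List (Int × String)) (x y : Int × String) (d : String) :
    PySem.List.pyGetD ((P ++ x :: y :: S).map Prod.snd) ((P.length : Int) + 1) d = y.2 := by
  have : ((P.length : Int) + 1) = ((P.length + 1 : Nat) : Int) := by push_cast; ring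
  rw [this, PySem.List.pyGetD_natCast]
  rw [List.getD_eq_getElem _ _ (n := P.length + 1) (by simp)]
  simp

-- strictly monotone indices: list position order matches node-index order
theorem pvPosMono (L : List (Int × String)) (hm : ((L.map Prod.fst)).Pairwise (· < ·))
    (k1 k2 : Nat) (h1 : k1 < L.length) (h2 : k2 < L.length) (hle : L[k1].1 ≤ L[k2].1) :
    k1 ≤ k2 := by
  by_contra hgt
  push Not at hgt
  have := List.pairwise_iff_getElem.1 hm k2 k1 (by simp; omega) (by simp; omega) hgt
  simp only [List.getElem_map] at this
  omega

theorem pvPosInj (L : List (Int × String)) (hm : ((L.map Prod.fst)).Pairwise (· < ·))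
    (k1 k2 : Nat) (h1 : k1 < L.length) (h2 : k2 < L.length) (he : L[k1].1 = L[k2].1) :
    k1 = k2 := by
  have := pvPosMono L hm k1 k2 h1 h2 (le_of_eq he)
  have := pvPosMono L hm k2 k1 h2 h1 (le_of_eq he.symm)
  omega

-- a valid popped entry identifies an adjacent pair of the chain
theorem pvValidSplit (ms : List (String × String)) (v : List (String × Int)) (n : Nat)
    (tokens : List String) (nxt prv : List Int) (alive : List Bool)
    (agenda : List (Int × Int × String × String)) (L : List (Int × String))
    (inv : pvInv ms v n tokens nxt prv alive agenda L)
    (i : Int) (a b : String)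
    (hi0 : 0 ≤ i) (hin : i < (n : Int))
    (halive : PySem.List.pyGetD alive i false = true)
    (hj : PySem.List.pyGetD nxt i (-1) ≠ -1)
    (hta : PySem.List.pyGetD tokens i "" = a)
    (htb : PySem.List.pyGetD tokens (PySem.List.pyGetD nxt i (-1)) "" = b) :
    ∃ P S, L = P ++ (i, a) :: (PySem.List.pyGetD nxt i (-1), b) :: S := by
  have hmem : i ∈ L.map Prod.fst := (inv.aliveIff i hi0 hin).1 halive
  rcases List.mem_map.1 hmem with ⟨x, hxL, hx1⟩
  rcases pvMemSplit L x hxL with ⟨P, R, hLP⟩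
  have hx2 : x.2 = a := by
    have := inv.tok x hxL
    rw [hx1] at this
    rw [← this, hta]
  rcases R with _ | ⟨y, S⟩
  · exfalso
    apply hj
    have : L.getLast? = some x := by rw [hLP]; simp
    have := inv.lastNxt x this
    rw [hx1] at this
    exact this
  · have hadj : pvAdj L x y := by
      rw [hLP]
      exact pvAdj_boundary_right P (y :: S) x y rfl
    have hnx : PySem.List.pyGetD nxt x.1 (-1) = y.1 := inv.linkNxt x y hadj
    rw [hx1] at hnx
    have hy2 : y.2 = b := by
      have := inv.tok y (pvAdj_mem_right hadj)
      rw [← this, ← hnx, htb]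
    refine ⟨P, S, ?_⟩
    rw [hLP]
    have : x = (i, a) := Prod.ext hx1 hx2
    rw [this]
    have : y = (PySem.List.pyGetD nxt i (-1), b) := Prod.ext hnx.symm hy2
    rw [this]


-- A's scan result: exactly the pair named by the valid head entry of the agenda
theorem pvArgmin (ms : List (String × String)) (v : List (String × Int)) (n : Nat)
    (tokens : List String) (nxt prv : List Int) (alive : List Bool)
    (rest : List (Int × Int × String × String)) (L P S : List (Int × String))
    (i j tid : Int) (a b : String)
    (inv : pvInv ms v n tokens nxt prv alive ((tid, i, a, b) :: rest) L)
    (hL : L = P ++ (i, a) :: (j, b) :: S) :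
    (pvACands ms v (L.map Prod.snd)).foldl pvMinStep none = some (tid, (P.length : Int)) := by
  rcases inv.agOK (tid, i, a, b) List.mem_cons_self with ⟨hcont, hget, _, _⟩
  have hwa : PySem.List.pyGetD (L.map Prod.snd) (P.length : Int) "" = a := by
    rw [hL]; exact pvWsGet P ((j, b) :: S) (i, a) ""
  have hwb : PySem.List.pyGetD (L.map Prod.snd) ((P.length : Int) + 1) "" = b := by
    rw [hL]; exact pvWsGetSucc P S (i, a) (j, b) ""
  have hlen : (L.map Prod.snd).length = P.length + 2 + S.length := by
    rw [hL]; simp; omega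
  have hcand : pvCandOf (L.map Prod.snd) ms v (P.length : Int) = some (tid, (P.length : Int)) := by
    simp only [pvCandOf, hwa, hwb, hcont, if_true, hget]
  have hmem : (tid, (P.length : Int)) ∈ pvACands ms v (L.map Prod.snd) := by
    apply List.mem_filterMap.2
    refine ⟨(P.length : Int), ?_, hcand⟩
    apply (PySem.List.mem_pyRange_one).2
    constructor
    · omega
    · simp only [PySem.List.len_eq, hlen]
      push_cast
      omega
  apply pvFoldMin_eq _ _ (pvACands_pairwise ms v _) hmem
  intro c hc hne
  rcases pvCand_mem_nonneg ms v _ c hc with ⟨hc0, hclt, hcof⟩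
  have hk1 : c.2.toNat + 1 < L.length := by
    simp only [PySem.List.len_eq] at hclt
    have : L.length = (L.map Prod.snd).length := by simp
    omega
  rcases pvPosSplit L c.2.toNat hk1 with ⟨P', x, y, S', hL', hP'⟩
  have hc2 : c.2 = (c.2.toNat : Int) := by omega
  have hwx : PySem.List.pyGetD (L.map Prod.snd) c.2 "" = x.2 := by
    rw [hc2, ← hP', hL']
    exact pvWsGet P' (y :: S') x ""
  have hwy : PySem.List.pyGetD (L.map Prod.snd) (c.2 + 1) "" = y.2 := by
    rw [hc2, ← hP', hL']
    exact pvWsGetSucc P' S' x y ""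
  have hcontc : PySem.Set.contains ms (x.2, y.2) = true ∧
      PySem.Dict.get? (PySem.Dict.mk v) (x.2 ++ y.2) = some c.1 := by
    simp only [pvCandOf, hwx, hwy] at hcof
    split at hcof
    · rename_i hco
      split at hcof
      · rename_i t hg
        have hceq2 : (t, c.2) = c := Option.some.inj hcof
        refine ⟨hco, ?_⟩
        rw [← hceq2]
        simpa using hg
      · exact absurd hcof (by simp)
    · exact absurd hcof (by simp)
  have hadjxy : pvAdj L x y := by
    rw [hL']
    exact pvAdj_boundary_right P' (y :: S') x y rfl
  have hent : (c.1, x.1, x.2, y.2) ∈ (tid, i, a, b) :: rest :=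
    inv.agComplete x y hadjxy c.1 hcontc.1 hcontc.2
  have hLk'o : L[c.2.toNat]? = some x := by
    rw [hL', ← hP']
    rw [List.getElem?_append_right (le_refl _)]
    simp
  have hLk' : L[c.2.toNat]'(by omega) = x := by
    rcases List.getElem?_eq_some_iff.1 hLk'o with ⟨h, he⟩
    exact he
  have hLPo : L[P.length]? = some (i, a) := by
    rw [hL]
    rw [List.getElem?_append_right (le_refl _)]
    simp
  have hPlen : P.length < L.length := by rw [hL]; simp
  have hLP : L[P.length]'hPlen = (i, a) := by
    rcases List.getElem?_eq_some_iff.1 hLPo with ⟨h, he⟩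
    exact he
  -- if the entry is (or key-equals) the head, positions coincide and c = m
  have hceq : c.1 = tid → x.1 = i → False := by
    intro h1 h2
    apply hne
    have hpos : c.2.toNat = P.length := by
      apply pvPosInj L inv.mono _ _ (by omega) hPlen
      rw [hLk', hLP, h2]
    have : c = (c.1, c.2) := rfl
    rw [this, h1, hc2, hpos]
  rcases List.mem_cons.1 hent with heq | hrest
  · -- entry literally equals the head
    exfalso
    apply hceq
    · exact (congrArg Prod.fst heq)
    · exact congrArg (fun z => z.2.1) heq
  · have hkey : pvKeyLE (tid, i, a, b) (c.1, x.1, x.2, y.2) :=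
      (List.pairwise_cons.1 inv.agSorted).1 _ hrest
    rcases hkey with h1 | ⟨h1, h2⟩
    · exact Or.inl h1
    · -- same id: compare positions
      simp only at h1 h2
      by_cases hxi : x.1 = i
      · exact absurd (hceq h1.symm hxi) (fun h => h)
      · right
        refine ⟨h1, ?_⟩
        have hilt : i < x.1 := lt_of_le_of_ne h2 (fun h => hxi h.symm)
        have hmono := pvPosMono L inv.mono P.length c.2.toNat hPlen (by omega)
          (by rw [hLk', hLP]; exact le_of_lt hilt)
        have hneq : P.length ≠ c.2.toNat := by
          intro h
          apply hxi
          rw [← h, hLPo] at hLk'o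
          have := Option.some.inj hLk'o
          rw [← this]
        simp only
        omega


-- stale entries name no current pair: dropping one preserves the invariant
theorem pvStaleInv (ms : List (String × String)) (v : List (String × Int)) (n : Nat)
    (tokens : List String) (nxt prv : List Int) (alive : List Bool)
    (rest : List (Int × Int × String × String)) (L : List (Int × String))
    (tid i : Int) (a b : String)
    (inv : pvInv ms v n tokens nxt prv alive ((tid, i, a, b) :: rest) L)
    (hstale : PySem.List.pyGetD alive i false = false ∨ PySem.List.pyGetD nxt i (-1) = -1 ∨
      PySem.List.pyGetD tokens i "" ≠ a ∨
      PySem.List.pyGetD tokens (PySem.List.pyGetD nxt i (-1)) "" ≠ b) :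
    pvInv ms v n tokens nxt prv alive rest L := by
  refine ⟨inv.lenTok, inv.lenNxt, inv.lenPrv, inv.lenAlive, inv.mono, inv.bounds, inv.head0,
    inv.nonnil, inv.tok, inv.aliveIff, inv.linkNxt, inv.lastNxt, inv.linkPrv, inv.headPrv,
    (List.pairwise_cons.1 inv.agSorted).2,
    (fun e he => inv.agOK e (List.mem_cons_of_mem _ he)), ?_⟩
  intro x y hadj t hcont hget
  have hent := inv.agComplete x y hadj t hcont hget
  rcases List.mem_cons.1 hent with heq | hrest
  · exfalso
    have hx1 : x.1 = i := congrArg (fun z => z.2.1) heq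
    have hx2 : x.2 = a := congrArg (fun z => z.2.2.1) heq
    have hy2 : y.2 = b := congrArg (fun z => z.2.2.2) heq
    have hxL := pvAdj_mem_left hadj
    have hyL := pvAdj_mem_right hadj
    have hbx := inv.bounds x hxL
    have hby := inv.bounds y hyL
    have halive : PySem.List.pyGetD alive i false = true := by
      rw [← hx1]
      exact (inv.aliveIff x.1 hbx.1 hbx.2).2 (List.mem_map_of_mem hxL)
    have hnx : PySem.List.pyGetD nxt i (-1) = y.1 := by
      rw [← hx1]; exact inv.linkNxt x y hadj
    have htx : PySem.List.pyGetD tokens i "" = a := by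
      rw [← hx1, ← hx2]; exact inv.tok x hxL
    have hty : PySem.List.pyGetD tokens (PySem.List.pyGetD nxt i (-1)) "" = b := by
      rw [hnx, ← hy2]; exact inv.tok y hyL
    rcases hstale with h | h | h | h
    · rw [halive] at h; cases h
    · rw [hnx] at h; omega
    · exact h htx
    · exact h hty
  · exact hrest

-- with an empty agenda there are no candidates at all
theorem pvCandsEmpty (ms : List (String × String)) (v : List (String × Int)) (n : Nat)
    (tokens : List String) (nxt prv : List Int) (alive : List Bool) (L : List (Int × String))
    (inv : pvInv ms v n tokens nxt prv alive [] L) :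
    pvACands ms v (L.map Prod.snd) = [] := by
  rcases h : pvACands ms v (L.map Prod.snd) with _ | ⟨c, t⟩
  · rfl
  · exfalso
    have hc : c ∈ pvACands ms v (L.map Prod.snd) := by rw [h]; exact List.mem_cons_self
    rcases pvCand_mem_nonneg ms v _ c hc with ⟨hc0, hclt, hcof⟩
    have hk1 : c.2.toNat + 1 < L.length := by
      simp only [PySem.List.len_eq] at hclt
      have : L.length = (L.map Prod.snd).length := by simp
      omega
    rcases pvPosSplit L c.2.toNat hk1 with ⟨P', x, y, S', hL', hP'⟩
    have hc2 : c.2 = (c.2.toNat : Int) := by omega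
    have hwx : PySem.List.pyGetD (L.map Prod.snd) c.2 "" = x.2 := by
      rw [hc2, ← hP', hL']
      exact pvWsGet P' (y :: S') x ""
    have hwy : PySem.List.pyGetD (L.map Prod.snd) (c.2 + 1) "" = y.2 := by
      rw [hc2, ← hP', hL']
      exact pvWsGetSucc P' S' x y ""
    have hcontc : PySem.Set.contains ms (x.2, y.2) = true ∧
        PySem.Dict.get? (PySem.Dict.mk v) (x.2 ++ y.2) = some c.1 := by
      simp only [pvCandOf, hwx, hwy] at hcof
      split at hcof
      · rename_i hco
        split at hcof
        · rename_i t' hg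
          have hceq2 : (t', c.2) = c := Option.some.inj hcof
          refine ⟨hco, ?_⟩
          rw [← hceq2]
          simpa using hg
        · exact absurd hcof (by simp)
      · exact absurd hcof (by simp)
    have hadjxy : pvAdj L x y := by
      rw [hL']
      exact pvAdj_boundary_right P' (y :: S') x y rfl
    exact absurd (inv.agComplete x y hadjxy c.1 hcontc.1 hcontc.2) (by simp)

-- the shape of a successful entry computation
theorem pvEntry?_shape (ms : List (String × String)) (v : List (String × Int))
    (toks : List String) (x y : Int) (e : Int × Int × String × String)
    (h : pvEntry? ms v toks x y = some e) :
    e = (e.1, x, PySem.List.pyGetD toks x "", PySem.List.pyGetD toks y "") ∧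
    PySem.Set.contains ms (PySem.List.pyGetD toks x "", PySem.List.pyGetD toks y "") = true ∧
    PySem.Dict.get? (PySem.Dict.mk v) (PySem.List.pyGetD toks x "" ++ PySem.List.pyGetD toks y "") = some e.1 := by
  simp only [pvEntry?] at h
  split at h
  · rename_i hco
    split at h
    · rename_i t hg
      cases h
      exact ⟨rfl, hco, hg⟩
    · cases h
  · cases h


-- A's splice at list position P.length is the chain with the pair replaced by the merged node
theorem pvSplice (P S : List (Int × String)) (i j : Int) (a b : String) :
    PySem.List.slice ((P ++ (i, a) :: (j, b) :: S).map Prod.snd) none (some (P.length : Int)) ++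
    [PySem.List.pyGetD ((P ++ (i, a) :: (j, b) :: S).map Prod.snd) (P.length : Int) "" ++
      PySem.List.pyGetD ((P ++ (i, a) :: (j, b) :: S).map Prod.snd) ((P.length : Int) + 1) ""] ++
    PySem.List.slice ((P ++ (i, a) :: (j, b) :: S).map Prod.snd) (some ((P.length : Int) + 2)) none
    = (P ++ (i, a ++ b) :: S).map Prod.snd := by
  rw [pvWsGet P ((j, b) :: S) (i, a), pvWsGetSucc P S (i, a) (j, b)]
  rw [PySem.List.slice_to_natCast]
  have h2 : (P.length : Int) + 2 = ((P.length + 2 : Nat) : Int) := by push_cast; ring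
  rw [h2, PySem.List.slice_from_natCast]
  simp only [List.map_append, List.map_cons]
  rw [List.take_left' (by simp)]
  have hdrop : List.drop (P.length + 2) ((P.map Prod.snd) ++ a :: b :: S.map Prod.snd)
      = S.map Prod.snd := by
    simp [List.drop_append]
  rw [hdrop]
  simp

-- merging the popped valid pair re-establishes the invariant on the shortened chain
theorem pvMergeInv (ms : List (String × String)) (v : List (String × Int)) (n : Nat)
    (tokens : List String) (nxt prv : List Int) (alive : List Bool)
    (rest : List (Int × Int × String × String)) (L P S : List (Int × String))
    (tid i j nj pp : Int) (a b : String)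
    (inv : pvInv ms v n tokens nxt prv alive ((tid, i, a, b) :: rest) L)
    (hL : L = P ++ (i, a) :: (j, b) :: S)
    (hnj : PySem.List.pyGetD nxt j (-1) = nj)
    (hpp : PySem.List.pyGetD (if nj ≠ -1 then PySem.List.pySetD prv nj i else prv) i (-1) = pp) :
    pvInv ms v n (PySem.List.pySetD tokens i (a ++ b)) (PySem.List.pySetD nxt i nj)
      (if nj ≠ -1 then PySem.List.pySetD prv nj i else prv) (PySem.List.pySetD alive j false)
      (let ag1 := if pp ≠ -1 then
          (match pvEntry? ms v (PySem.List.pySetD tokens i (a ++ b)) pp i with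
           | some e => pvPush rest e | none => rest)
        else rest
       if nj ≠ -1 then
          (match pvEntry? ms v (PySem.List.pySetD tokens i (a ++ b)) i nj with
           | some e => pvPush ag1 e | none => ag1)
        else ag1)
      (P ++ (i, a ++ b) :: S) := by
  obtain ⟨hPi, hij, hSj, hPS⟩ := pvSplitMono P S (i, a) (j, b) (by rw [← hL]; exact inv.mono)
  simp only at hPi hij hSj hPS
  have hbi := inv.bounds (i, a) (by rw [hL]; simp)
  have hbj := inv.bounds (j, b) (by rw [hL]; simp)
  simp only at hbi hbj
  have hmemP : ∀ q ∈ P, q ∈ L := fun q hq => by rw [hL]; exact List.mem_append_left _ hq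
  have hmemS : ∀ s ∈ S, s ∈ L := fun s hs => by rw [hL]; simp [hs]
  have hbP : ∀ q ∈ P, 0 ≤ q.1 ∧ q.1 < (n : Int) := fun q hq => inv.bounds q (hmemP q hq)
  have hbS : ∀ s ∈ S, 0 ≤ s.1 ∧ s.1 < (n : Int) := fun s hs => inv.bounds s (hmemS s hs)
  -- the value of nj
  have hnjspec : (S = [] ∧ nj = -1) ∨ (∃ y0 S', S = y0 :: S' ∧ nj = y0.1) := by
    rcases S with _ | ⟨y0, S'⟩
    · left
      refine ⟨rfl, ?_⟩
      rw [← hnj]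
      apply inv.lastNxt (j, b)
      rw [hL]
      rw [List.getLast?_append]
      simp
    · right
      refine ⟨y0, S', rfl, ?_⟩
      rw [← hnj]
      apply inv.linkNxt (j, b) y0
      rw [hL]
      have := pvAdj_boundary_right (P ++ [(i, a)]) (y0 :: S') (j, b) y0 rfl
      simpa using this
  have hnjfacts : nj ≠ -1 → 0 ≤ nj ∧ nj < (n : Int) ∧ j < nj := by
    intro hne
    rcases hnjspec with ⟨_, rfl⟩ | ⟨y0, S', hS, rfl⟩
    · exact absurd rfl hne
    · have := hbS y0 (by rw [hS]; simp)
      have := hSj y0 (by rw [hS]; simp)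
      omega
  have hnji : nj ≠ i := by
    by_cases hne : nj = -1
    · omega
    · have := hnjfacts hne; omega
  -- reading prv at i after the (possible) write at nj
  have hprvi : PySem.List.pyGetD (if nj ≠ -1 then PySem.List.pySetD prv nj i else prv) i (-1)
      = PySem.List.pyGetD prv i (-1) := by
    split
    · rename_i hne
      rcases hnjfacts hne with ⟨h0, hlt, _⟩
      rw [pvGetSet prv nj i i (-1) h0 (by rw [inv.lenPrv]; exact_mod_cast hlt) hbi.1]
      rw [if_neg hnji.symm]
    · rfl
  -- the value of pp
  have hppspec : (P = [] ∧ pp = -1) ∨ (∃ P0 pl, P = P0 ++ [pl] ∧ pp = pl.1) := by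
    rcases List.eq_nil_or_concat P with hPnil | ⟨P0, pl, hPc0⟩
    · left
      refine ⟨hPnil, ?_⟩
      rw [← hpp, hprvi]
      apply inv.headPrv (i, a) ((j, b) :: S)
      rw [hL, hPnil]; rfl
    · have hPc : P = P0 ++ [pl] := by rw [hPc0, List.concat_eq_append]
      right
      refine ⟨P0, pl, hPc, ?_⟩
      rw [← hpp, hprvi]
      apply inv.linkPrv pl (i, a)
      rw [hL, hPc]
      have := pvAdj_boundary_left (P0 ++ [pl]) ((j, b) :: S) (i, a) pl (by simp)
      simpa using this
  have hppfacts : pp ≠ -1 → ∃ P0 pl, P = P0 ++ [pl] ∧ pp = pl.1 ∧ 0 ≤ pp ∧ pp < (n : Int) ∧ pp < i := by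
    intro hne
    rcases hppspec with ⟨_, rfl⟩ | ⟨P0, pl, hPc, rfl⟩
    · exact absurd rfl hne
    · have h1 := hbP pl (by rw [hPc]; simp)
      have h2 := hPi pl (by rw [hPc]; simp)
      exact ⟨P0, pl, hPc, rfl, h1.1, h1.2, h2⟩
  -- membership of indices
  have hPiNe : ∀ q ∈ P, q.1 ≠ i := fun q hq => ne_of_lt (hPi q hq)
  have hSiNe : ∀ s ∈ S, s.1 ≠ i := fun s hs => by have := hSj s hs; omega
  have hPjNe : ∀ q ∈ P, q.1 ≠ j := fun q hq => by have := hPi q hq; omega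
  have hSjNe : ∀ s ∈ S, s.1 ≠ j := fun s hs => by have := hSj s hs; omega
  have hijne : i ≠ j := ne_of_lt hij
  -- reads of the updated arrays
  have hTok' : ∀ idx : Int, 0 ≤ idx →
      PySem.List.pyGetD (PySem.List.pySetD tokens i (a ++ b)) idx "" =
        if idx = i then a ++ b else PySem.List.pyGetD tokens idx "" := fun idx h0 =>
    pvGetSet tokens i idx (a ++ b) "" hbi.1 (by rw [inv.lenTok]; exact_mod_cast hbi.2) h0
  have hNxt' : ∀ idx : Int, 0 ≤ idx →
      PySem.List.pyGetD (PySem.List.pySetD nxt i nj) idx (-1) =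
        if idx = i then nj else PySem.List.pyGetD nxt idx (-1) := fun idx h0 =>
    pvGetSet nxt i idx nj (-1) hbi.1 (by rw [inv.lenNxt]; exact_mod_cast hbi.2) h0
  have hAlive' : ∀ idx : Int, 0 ≤ idx →
      PySem.List.pyGetD (PySem.List.pySetD alive j false) idx false =
        if idx = j then false else PySem.List.pyGetD alive idx false := fun idx h0 =>
    pvGetSet alive j idx false false hbj.1 (by rw [inv.lenAlive]; exact_mod_cast hbj.2) h0
  have hPrv' : ∀ idx : Int, 0 ≤ idx → idx ≠ nj →
      PySem.List.pyGetD (if nj ≠ -1 then PySem.List.pySetD prv nj i else prv) idx (-1) =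
        PySem.List.pyGetD prv idx (-1) := by
    intro idx h0 hne
    split
    · rename_i hne2
      rcases hnjfacts hne2 with ⟨hh0, hhlt, _⟩
      rw [pvGetSet prv nj idx i (-1) hh0 (by rw [inv.lenPrv]; exact_mod_cast hhlt) h0]
      rw [if_neg hne]
    · rfl
  -- adjacency transfers from the new chain to the old one
  have hAdjP : ∀ x y, pvAdj P x y → pvAdj L x y := by
    intro x y h
    rw [hL]
    exact pvAdj_append_left P _ x y h
  have hAdjS : ∀ x y, pvAdj S x y → pvAdj L x y := by
    intro x y h
    rw [hL]
    have := pvAdj_append_right (P ++ [(i, a), (j, b)]) S x y h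
    simpa using this
  have hAdjBL : ∀ x, P.getLast? = some x → pvAdj L x (i, a) := by
    intro x h
    rw [hL]
    exact pvAdj_boundary_left P ((j, b) :: S) (i, a) x h
  have hAdjBR : ∀ y, S.head? = some y → pvAdj L (j, b) y := by
    intro y h
    rw [hL]
    have := pvAdj_boundary_right (P ++ [(i, a)]) S (j, b) y h
    simpa using this
  -- every element of rest survives into the new agenda
  have hKeep : ∀ z ∈ rest,
      z ∈ (let ag1 := if pp ≠ -1 then
          (match pvEntry? ms v (PySem.List.pySetD tokens i (a ++ b)) pp i with
           | some e => pvPush rest e | none => rest)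
        else rest
       if nj ≠ -1 then
          (match pvEntry? ms v (PySem.List.pySetD tokens i (a ++ b)) i nj with
           | some e => pvPush ag1 e | none => ag1)
        else ag1) := by
    intro z hz
    simp only
    split
    · rcases hh : pvEntry? ms v (PySem.List.pySetD tokens i (a ++ b)) i nj with _ | e
      · simp only [hh]
        split
        · rcases hh2 : pvEntry? ms v (PySem.List.pySetD tokens i (a ++ b)) pp i with _ | e2
          · simpa [hh2] using hz
          · simp only [hh2]
            exact (pvPush_mem _ _ _).2 (Or.inr hz)
        · exact hz
      · simp only [hh]
        apply (pvPush_mem _ _ _).2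
        right
        split
        · rcases hh2 : pvEntry? ms v (PySem.List.pySetD tokens i (a ++ b)) pp i with _ | e2
          · simpa [hh2] using hz
          · simp only [hh2]
            exact (pvPush_mem _ _ _).2 (Or.inr hz)
        · exact hz
    · split
      · rcases hh2 : pvEntry? ms v (PySem.List.pySetD tokens i (a ++ b)) pp i with _ | e2
        · simpa [hh2] using hz
        · simp only [hh2]
          exact (pvPush_mem _ _ _).2 (Or.inr hz)
      · exact hz
  have hrestSorted := (List.pairwise_cons.1 inv.agSorted).2
  have hrestOK : ∀ e ∈ rest, PySem.Set.contains ms (e.2.2.1, e.2.2.2) = true ∧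
      PySem.Dict.get? (PySem.Dict.mk v) (e.2.2.1 ++ e.2.2.2) = some e.1 ∧
      0 ≤ e.2.1 ∧ e.2.1 < (n : Int) :=
    fun e he => inv.agOK e (List.mem_cons_of_mem _ he)
  -- sortedness and well-formedness survive both conditional pushes
  have hag1Props : ∀ (ag1' : List (Int × Int × String × String)),
      ag1' = (if pp ≠ -1 then
          (match pvEntry? ms v (PySem.List.pySetD tokens i (a ++ b)) pp i with
           | some e => pvPush rest e | none => rest)
        else rest) →
      ag1'.Pairwise pvKeyLE ∧ (∀ e ∈ ag1', PySem.Set.contains ms (e.2.2.1, e.2.2.2) = true ∧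
        PySem.Dict.get? (PySem.Dict.mk v) (e.2.2.1 ++ e.2.2.2) = some e.1 ∧
        0 ≤ e.2.1 ∧ e.2.1 < (n : Int)) := by
    intro ag1' hag1'
    rw [hag1']
    split
    · rename_i hppne
      rcases hppfacts hppne with ⟨P0, pl, hPc, hppl, hpp0, hppn, hppi⟩
      rcases hh2 : pvEntry? ms v (PySem.List.pySetD tokens i (a ++ b)) pp i with _ | e2
      · exact ⟨hrestSorted, hrestOK⟩
      · rcases pvEntry?_shape ms v _ pp i e2 hh2 with ⟨he2, hco2, hg2⟩
        constructor
        · exact pvPush_pairwise rest e2 hrestSorted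
        · intro e he
          rcases (pvPush_mem rest e2 e).1 he with rfl | hre
          · refine ⟨?_, ?_, ?_, ?_⟩
            · rw [he2]; exact hco2
            · rw [he2]; simpa using hg2
            · rw [he2]; simpa using hpp0
            · rw [he2]; simpa using hppn
          · exact hrestOK e hre
    · exact ⟨hrestSorted, hrestOK⟩
  have hag2Props : ((let ag1 := if pp ≠ -1 then
          (match pvEntry? ms v (PySem.List.pySetD tokens i (a ++ b)) pp i with
           | some e => pvPush rest e | none => rest)
        else rest
       if nj ≠ -1 then
          (match pvEntry? ms v (PySem.List.pySetD tokens i (a ++ b)) i nj with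
           | some e => pvPush ag1 e | none => ag1)
        else ag1) : List (Int × Int × String × String)).Pairwise pvKeyLE ∧
      (∀ e ∈ (let ag1 := if pp ≠ -1 then
          (match pvEntry? ms v (PySem.List.pySetD tokens i (a ++ b)) pp i with
           | some e => pvPush rest e | none => rest)
        else rest
       if nj ≠ -1 then
          (match pvEntry? ms v (PySem.List.pySetD tokens i (a ++ b)) i nj with
           | some e => pvPush ag1 e | none => ag1)
        else ag1), PySem.Set.contains ms (e.2.2.1, e.2.2.2) = true ∧
        PySem.Dict.get? (PySem.Dict.mk v) (e.2.2.1 ++ e.2.2.2) = some e.1 ∧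
        0 ≤ e.2.1 ∧ e.2.1 < (n : Int)) := by
    rcases hag1Props _ rfl with ⟨hs1, ho1⟩
    simp only
    split
    · rcases hh3 : pvEntry? ms v (PySem.List.pySetD tokens i (a ++ b)) i nj with _ | e3
      · exact ⟨hs1, ho1⟩
      · rcases pvEntry?_shape ms v _ i nj e3 hh3 with ⟨he3, hco3, hg3⟩
        constructor
        · exact pvPush_pairwise _ e3 hs1
        · intro e he
          rcases (pvPush_mem _ e3 e).1 he with rfl | hre
          · refine ⟨?_, ?_, ?_, ?_⟩
            · rw [he3]; exact hco3
            · rw [he3]; simpa using hg3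
            · rw [he3]; simpa using hbi.1
            · rw [he3]; simpa using hbi.2
          · exact ho1 e hre
    · exact ⟨hs1, ho1⟩
  -- pairwise order inside S
  have hSmono : (S.map Prod.fst).Pairwise (· < ·) := by
    have hm := inv.mono
    rw [hL] at hm
    simp only [List.map_append, List.map_cons] at hm
    have := (List.pairwise_append.1 hm).2.1
    exact ((List.pairwise_cons.1 ((List.pairwise_cons.1 this).2)).2)
  refine ⟨?_, ?_, ?_, ?_, ?_, ?_, ?_, ?_, ?_, ?_, ?_, ?_, ?_, ?_, hag2Props.1, hag2Props.2, ?_⟩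
  -- lengths
  · rw [pvLength_pySetD tokens i _ hbi.1]; exact inv.lenTok
  · rw [pvLength_pySetD nxt i _ hbi.1]; exact inv.lenNxt
  · split
    · rename_i hne
      rw [pvLength_pySetD prv nj _ (hnjfacts hne).1]; exact inv.lenPrv
    · exact inv.lenPrv
  · rw [pvLength_pySetD alive j _ hbj.1]; exact inv.lenAlive
  -- mono
  · have hm := inv.mono
    rw [hL] at hm
    simp only [List.map_append, List.map_cons] at hm ⊢
    refine List.Pairwise.sublist ?_ hm
    exact List.Sublist.append_left
      (List.Sublist.cons₂ i (List.sublist_cons_self j (S.map Prod.fst))) _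
  -- bounds
  · intro x hx
    rcases List.mem_append.1 hx with hxP | hxM
    · exact hbP x hxP
    · rcases List.mem_cons.1 hxM with rfl | hxS
      · exact hbi
      · exact hbS x hxS
  -- head0
  · intro x T hxe
    rcases P with _ | ⟨p0, P'⟩
    · have hx : x = (i, a ++ b) := by
        rw [List.nil_append] at hxe
        injection hxe with h1 h2
        exact h1.symm
      rw [hx]
      exact inv.head0 (i, a) ((j, b) :: S) (by rw [hL]; rfl)
    · have hx : x = p0 := by
        rw [List.cons_append] at hxe
        injection hxe with h1 h2
        exact h1.symm
      rw [hx]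
      exact inv.head0 p0 (P' ++ (i, a) :: (j, b) :: S) (by rw [hL]; rfl)
  -- nonnil
  · intro _
    simp
  -- tok
  · intro x hx
    rcases List.mem_append.1 hx with hxP | hxM
    · rw [hTok' x.1 (hbP x hxP).1, if_neg (hPiNe x hxP)]
      exact inv.tok x (hmemP x hxP)
    · rcases List.mem_cons.1 hxM with rfl | hxS
      · rw [hTok' i hbi.1, if_pos rfl]
      · rw [hTok' x.1 (hbS x hxS).1, if_neg (hSiNe x hxS)]
        exact inv.tok x (hmemS x hxS)
  -- aliveIff
  · intro idx h0 hlt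
    rw [hAlive' idx h0]
    by_cases hidj : idx = j
    · subst hidj
      rw [if_pos rfl]
      constructor
      · intro h; cases h
      · intro h
        exfalso
        simp only [List.map_append, List.map_cons, List.mem_append, List.mem_cons] at h
        rcases h with h | h | h
        · rcases List.mem_map.1 h with ⟨q, hq, hq1⟩
          exact hPjNe q hq hq1
        · omega
        · rcases List.mem_map.1 h with ⟨s, hs, hs1⟩
          exact hSjNe s hs hs1
    · rw [if_neg hidj, inv.aliveIff idx h0 hlt, hL]
      simp only [List.map_append, List.map_cons, List.mem_append, List.mem_cons]
      constructor
      · rintro (h | h | h | h)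
        · exact Or.inl h
        · exact Or.inr (Or.inl h)
        · exact absurd h hidj
        · exact Or.inr (Or.inr h)
      · rintro (h | h | h)
        · exact Or.inl h
        · exact Or.inr (Or.inl h)
        · exact Or.inr (Or.inr (Or.inr h))
  -- linkNxt
  · intro x y hadj
    rcases pvAdj_cases P S (i, a ++ b) x y hadj with h | ⟨hlast, rfl⟩ | ⟨rfl, hhead⟩ | h
    · have hxP := pvAdj_mem_left h
      rw [hNxt' x.1 (hbP x hxP).1, if_neg (hPiNe x hxP)]
      exact inv.linkNxt x y (hAdjP x y h)
    · have hxP := List.mem_of_getLast? hlast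
      rw [hNxt' x.1 (hbP x hxP).1, if_neg (hPiNe x hxP)]
      exact inv.linkNxt x (i, a) (hAdjBL x hlast)
    · rw [hNxt' i hbi.1, if_pos rfl]
      rcases hnjspec with ⟨hSnil, _⟩ | ⟨y0, S', hS, hnjy⟩
      · rw [hSnil] at hhead; cases hhead
      · rw [hS] at hhead
        have : y = y0 := by cases hhead; rfl
        rw [this, hnjy]
    · have hxS := pvAdj_mem_left h
      rw [hNxt' x.1 (hbS x hxS).1, if_neg (hSiNe x hxS)]
      exact inv.linkNxt x y (hAdjS x y h)
  -- lastNxt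
  · intro x hxl
    rcases hS : S with _ | ⟨s0, S'⟩
    · have hx : x = (i, a ++ b) := by
        rw [hS, List.getLast?_append] at hxl
        simp at hxl
        rw [hxl]
      rw [hx]
      rw [hNxt' i hbi.1, if_pos rfl]
      rcases hnjspec with ⟨_, hnjm⟩ | ⟨y0, S', hS2, _⟩
      · exact hnjm
      · rw [hS] at hS2; cases hS2
    · have hxl2 : L.getLast? = some x := by
        rw [hL, hS, List.getLast?_append]
        rw [hS, List.getLast?_append] at hxl
        simpa using hxl
      have hxS : x ∈ S := by
        rw [hS]
        apply List.mem_of_getLast? (l := s0 :: S') (a := x)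
        rw [hS, List.getLast?_append] at hxl
        simpa using hxl
      rw [hNxt' x.1 (hbS x hxS).1, if_neg (hSiNe x hxS)]
      exact inv.lastNxt x hxl2
  -- linkPrv
  · intro x y hadj
    rcases pvAdj_cases P S (i, a ++ b) x y hadj with h | ⟨hlast, rfl⟩ | ⟨rfl, hhead⟩ | h
    · have hyP := pvAdj_mem_right h
      have hyne : y.1 ≠ nj := by
        by_cases hne : nj = -1
        · have := hbP y hyP; omega
        · have := hnjfacts hne
          have := hPi y hyP
          omega
      rw [hPrv' y.1 (hbP y hyP).1 hyne]
      exact inv.linkPrv x y (hAdjP x y h)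
    · rw [hPrv' i hbi.1 (fun h => hnji h.symm)]
      exact inv.linkPrv x (i, a) (hAdjBL x hlast)
    · rcases hnjspec with ⟨hSnil, _⟩ | ⟨y0, S', hS, hnjy⟩
      · rw [hSnil] at hhead; cases hhead
      · rw [hS] at hhead
        have hyy : y = y0 := by cases hhead; rfl
        have hnjne : ¬ (nj = -1) := by
          have := hbS y0 (by rw [hS]; simp)
          omega
        have hif : (if nj ≠ -1 then PySem.List.pySetD prv nj i else prv)
            = PySem.List.pySetD prv nj i := if_pos hnjne
        rw [hif]
        rcases hnjfacts hnjne with ⟨h0, hltn, _⟩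
        rw [pvGetSet prv nj y.1 i (-1) h0 (by rw [inv.lenPrv]; exact_mod_cast hltn)
          (hbS y (by rw [hS]; simp [hyy])).1]
        rw [if_pos (by rw [hyy, hnjy])]
    · -- pair inside S: the right endpoint is not the head of S
      have hyS := pvAdj_mem_right h
      have hyne : y.1 ≠ nj := by
        by_cases hne : nj = -1
        · have := hbS y hyS; omega
        · rcases hnjspec with ⟨_, hc⟩ | ⟨y0, S', hS, hnjy⟩
          · exact absurd hc hne
          · rcases h with ⟨k, hk1, hk2⟩
            have hk1' : k + 1 < S.length := (List.getElem?_eq_some_iff.1 hk2).1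
            have hy : S[k + 1]'hk1' = y := (List.getElem?_eq_some_iff.1 hk2).2
            have h0lt : (S[0]'(by omega)).1 < (S[k+1]'hk1').1 := by
              have := List.pairwise_iff_getElem.1 hSmono 0 (k+1)
                (by simp; omega) (by simp; omega) (by omega)
              simpa using this
            have hS0 : S[0]'(by omega) = y0 := by
              have hsome : S[0]? = some y0 := by rw [hS]; rfl
              rcases List.getElem?_eq_some_iff.1 hsome with ⟨_, he⟩
              exact he
            rw [hS0, hy] at h0lt
            omega
      rw [hPrv' y.1 (hbS y hyS).1 hyne]
      exact inv.linkPrv x y (hAdjS x y h)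
  -- headPrv
  · intro x T hxe
    rcases P with _ | ⟨p0, P'⟩
    · have hx : x = (i, a ++ b) := by
        rw [List.nil_append] at hxe
        injection hxe with h1 h2
        exact h1.symm
      rw [hx]
      have hgoal : PySem.List.pyGetD (if nj ≠ -1 then PySem.List.pySetD prv nj i else prv) i (-1) = -1 := by
        rw [hprvi]
        exact inv.headPrv (i, a) ((j, b) :: S) (by rw [hL]; rfl)
      exact hgoal
    · have hx : x = p0 := by
        rw [List.cons_append] at hxe
        injection hxe with h1 h2
        exact h1.symm
      rw [hx]
      have h00 : p0.1 = 0 := inv.head0 p0 (P' ++ (i, a) :: (j, b) :: S) (by rw [hL]; rfl)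
      have hp0ne : p0.1 ≠ nj := by
        by_cases hne : nj = -1
        · omega
        · have := hnjfacts hne
          omega
      rw [hPrv' p0.1 (hbP p0 List.mem_cons_self).1 hp0ne]
      exact inv.headPrv p0 (P' ++ (i, a) :: (j, b) :: S) (by rw [hL]; rfl)
  -- agComplete
  · intro x y hadj t hcont hget
    rcases pvAdj_cases P S (i, a ++ b) x y hadj with h | ⟨hlast, rfl⟩ | ⟨rfl, hhead⟩ | h
    · -- pair inside P: its entry is in rest and survives
      have hent := inv.agComplete x y (hAdjP x y h) t hcont hget
      have hxP := pvAdj_mem_left h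
      rcases List.mem_cons.1 hent with heq | hre
      · exfalso
        have : x.1 = i := congrArg (fun z => z.2.1) heq
        exact hPiNe x hxP this
      · exact hKeep _ hre
    · -- new left-boundary pair (P.last, merged node)
      have hxP := List.mem_of_getLast? hlast
      have hPne : P ≠ [] := by
        intro hP
        rw [hP] at hlast
        cases hlast
      rcases hppspec with ⟨hP, _⟩ | ⟨P0, pl, hPc, hppl⟩
      · exact absurd hP hPne
      · have hxpl : x = pl := by
          rw [hPc] at hlast
          rw [List.getLast?_append] at hlast
          simpa using hlast.symm
        have hppne : ¬ (pp = -1) := by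
          have := hbP pl (by rw [hPc]; simp)
          omega
        have hppi2 : pp ≠ i := by
          have := hPi pl (by rw [hPc]; simp)
          omega
        have hreadp : PySem.List.pyGetD (PySem.List.pySetD tokens i (a ++ b)) pp "" = x.2 := by
          rw [hTok' pp (by have := hbP pl (by rw [hPc]; simp); omega), if_neg hppi2, hppl, hxpl]
          exact inv.tok pl (hmemP pl (by rw [hPc]; simp))
        have hreadi : PySem.List.pyGetD (PySem.List.pySetD tokens i (a ++ b)) i "" = a ++ b := by
          rw [hTok' i hbi.1, if_pos rfl]
        have hent2 : pvEntry? ms v (PySem.List.pySetD tokens i (a ++ b)) pp i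
            = some (t, pp, x.2, a ++ b) := by
          simp only [pvEntry?, hreadp, hreadi]
          simp only at hcont hget
          rw [hcont, if_pos rfl, hget]
        simp only
        rw [if_pos hppne, hent2]
        have hxeq : x.1 = pp := by rw [hxpl, hppl]
        rw [hxeq]
        have hmem1 : ((t, pp, x.2, a ++ b) : Int × Int × String × String)
            ∈ pvPush rest (t, pp, x.2, a ++ b) := (pvPush_mem _ _ _).2 (Or.inl rfl)
        split
        · rcases hh : pvEntry? ms v (PySem.List.pySetD tokens i (a ++ b)) i nj with _ | e3
          · exact hmem1
          · exact (pvPush_mem _ _ _).2 (Or.inr hmem1)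
        · exact hmem1
    · -- new right-boundary pair (merged node, S.head)
      rcases hnjspec with ⟨hSnil, _⟩ | ⟨y0, S', hS, hnjy⟩
      · rw [hSnil] at hhead; cases hhead
      · rw [hS] at hhead
        have hyy : y = y0 := by cases hhead; rfl
        have hyS : y ∈ S := by rw [hS, hyy]; exact List.mem_cons_self
        have hnjne : ¬ (nj = -1) := by
          have := hbS y0 (by rw [hS]; simp)
          omega
        have hreadi : PySem.List.pyGetD (PySem.List.pySetD tokens i (a ++ b)) i "" = a ++ b := by
          rw [hTok' i hbi.1, if_pos rfl]
        have hreadnj : PySem.List.pyGetD (PySem.List.pySetD tokens i (a ++ b)) nj "" = y.2 := by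
          rw [hTok' nj (hnjfacts hnjne).1, if_neg hnji, hnjy, hyy]
          exact inv.tok y0 (hmemS y0 (by rw [hS]; simp))
        have hent3 : pvEntry? ms v (PySem.List.pySetD tokens i (a ++ b)) i nj
            = some (t, i, a ++ b, y.2) := by
          simp only [pvEntry?, hreadi, hreadnj]
          simp only at hcont hget
          rw [hcont, if_pos rfl, hget]
        simp only
        have hfin : ((t, i, a ++ b, y.2) : Int × Int × String × String) ∈ (if nj ≠ -1 then
            (match pvEntry? ms v (PySem.List.pySetD tokens i (a ++ b)) i nj with
             | some e => pvPush (if pp ≠ -1 then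
                (match pvEntry? ms v (PySem.List.pySetD tokens i (a ++ b)) pp i with
                 | some e => pvPush rest e | none => rest) else rest) e
             | none => (if pp ≠ -1 then
                (match pvEntry? ms v (PySem.List.pySetD tokens i (a ++ b)) pp i with
                 | some e => pvPush rest e | none => rest) else rest))
           else (if pp ≠ -1 then
                (match pvEntry? ms v (PySem.List.pySetD tokens i (a ++ b)) pp i with
                 | some e => pvPush rest e | none => rest) else rest)) := by
          rw [if_pos hnjne, hent3]
          exact (pvPush_mem _ _ _).2 (Or.inl rfl)
        exact hfin
    · -- pair inside S
      have hent := inv.agComplete x y (hAdjS x y h) t hcont hget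
      have hxS := pvAdj_mem_left h
      rcases List.mem_cons.1 hent with heq | hre
      · exfalso
        have : x.1 = i := congrArg (fun z => z.2.1) heq
        exact hSiNe x hxS this
      · exact hKeep _ hre


theorem pvAg1Len (ms : List (String × String)) (v : List (String × Int)) (toks : List String)
    (rest : List (Int × Int × String × String)) (pp i : Int) :
    (if pp ≠ -1 then (match pvEntry? ms v toks pp i with
      | some e => pvPush rest e | none => rest) else rest).length ≤ rest.length + 1 := by
  split
  · rcases h : pvEntry? ms v toks pp i with _ | e
    · show rest.length ≤ rest.length + 1
      omega
    · show (pvPush rest e).length ≤ rest.length + 1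
      rw [pvPush_length]
  · omega

theorem pvAg2Len (ms : List (String × String)) (v : List (String × Int)) (toks : List String)
    (ag1 rest : List (Int × Int × String × String)) (i nj : Int)
    (h1 : ag1.length ≤ rest.length + 1) :
    (if nj ≠ -1 then (match pvEntry? ms v toks i nj with
      | some e => pvPush ag1 e | none => ag1) else ag1).length ≤ rest.length + 2 := by
  split
  · rcases h : pvEntry? ms v toks i nj with _ | e
    · show ag1.length ≤ rest.length + 2
      omega
    · show (pvPush ag1 e).length ≤ rest.length + 2
      rw [pvPush_length]
      omega
  · omega

-- terminal state: empty agenda means A's loop is finished and the walk reads off the word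
theorem pvSimEnd (ms : List (String × String)) (v : List (String × Int)) (n : Nat)
    (tokens : List String) (nxt prv : List Int) (alive : List Bool) (L : List (Int × String))
    (inv : pvInv ms v n tokens nxt prv alive [] L) :
    pvWalk tokens nxt (n + 1) (if 0 < n then (0 : Int) else -1)
      = pvALoop ms v (L.length + 1) (L.map Prod.snd) := by
  have hlen : L.length ≤ n := by
    have := pvChain_length_le (L.map Prod.fst) n inv.mono
      (fun x hx => by rcases List.mem_map.1 hx with ⟨q, hq, rfl⟩; exact inv.bounds q hq)
    simpa using this
  have hwalk : pvWalk tokens nxt (n + 1) (if 0 < n then (0 : Int) else -1) = L.map Prod.snd := by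
    apply pvWalk_eq tokens nxt L (n + 1) _ inv.tok
      (fun x hx => (inv.bounds x hx).1) inv.linkNxt inv.lastNxt
    · intro hnil
      rcases Nat.eq_zero_or_pos n with h0 | hpos
      · rw [if_neg (by omega)]
      · exact absurd hnil (inv.nonnil hpos)
    · intro x T hxe
      have hx0 : x.1 = 0 := inv.head0 x T hxe
      have hxn : x.1 < (n : Int) := (inv.bounds x (by rw [hxe]; exact List.mem_cons_self)).2
      rw [if_pos (by omega), hx0]
    · omega
  rw [hwalk, pvARound]
  rw [pvCandsEmpty ms v n tokens nxt prv alive L inv]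
  rfl

-- the main simulation: from any invariant state, B's loop+walk computes what A's loop computes
theorem pvSim (ms : List (String × String)) (v : List (String × Int)) (n : Nat) :
    ∀ (fuel : Nat) (tokens : List String) (nxt prv : List Int) (alive : List Bool)
      (agenda : List (Int × Int × String × String)) (L : List (Int × String)),
    pvInv ms v n tokens nxt prv alive agenda L →
    agenda.length + 2 * L.length ≤ fuel →
    pvWalk (pvBLoop ms v fuel tokens nxt prv alive agenda).1
           (pvBLoop ms v fuel tokens nxt prv alive agenda).2 (n + 1)
           (if 0 < n then (0 : Int) else -1)
      = pvALoop ms v (L.length + 1) (L.map Prod.snd) := by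
  intro fuel
  induction fuel with
  | zero =>
    intro tokens nxt prv alive agenda L inv hfuel
    have hag : agenda = [] := by
      cases agenda with
      | nil => rfl
      | cons e t => simp at hfuel
    subst hag
    exact pvSimEnd ms v n tokens nxt prv alive L inv
  | succ fuel ih =>
    intro tokens nxt prv alive agenda L inv hfuel
    rcases agenda with _ | ⟨⟨tid, i, a, b⟩, rest⟩
    · exact pvSimEnd ms v n tokens nxt prv alive L inv
    · simp only [pvBLoop]
      by_cases hstale : PySem.List.pyGetD alive i false = false ∨ PySem.List.pyGetD nxt i (-1) = -1 ∨
          PySem.List.pyGetD tokens i "" ≠ a ∨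
          PySem.List.pyGetD tokens (PySem.List.pyGetD nxt i (-1)) "" ≠ b
      · rw [if_pos hstale]
        exact ih tokens nxt prv alive rest L
          (pvStaleInv ms v n tokens nxt prv alive rest L tid i a b inv hstale)
          (by simp only [List.length_cons] at hfuel; omega)
      · rw [if_neg hstale]
        push Not at hstale
        rcases hstale with ⟨halive, hjne, hta, htb⟩
        have halive' : PySem.List.pyGetD alive i false = true := by
          cases h : PySem.List.pyGetD alive i false
          · exact absurd h halive
          · rfl
        rcases inv.agOK (tid, i, a, b) List.mem_cons_self with ⟨_, _, hi0, hin⟩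
        simp only at hi0 hin
        rcases pvValidSplit ms v n tokens nxt prv alive ((tid, i, a, b) :: rest) L inv i a b
          hi0 hin halive' hjne hta htb with ⟨P, S, hL⟩
        have hinv' := pvMergeInv ms v n tokens nxt prv alive rest L P S tid i
          (PySem.List.pyGetD nxt i (-1))
          (PySem.List.pyGetD nxt (PySem.List.pyGetD nxt i (-1)) (-1))
          (PySem.List.pyGetD (if PySem.List.pyGetD nxt (PySem.List.pyGetD nxt i (-1)) (-1) ≠ -1 then
            PySem.List.pySetD prv (PySem.List.pyGetD nxt (PySem.List.pyGetD nxt i (-1)) (-1)) i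
            else prv) i (-1))
          a b inv hL rfl rfl
        have hfold := pvArgmin ms v n tokens nxt prv alive rest L P S i
          (PySem.List.pyGetD nxt i (-1)) tid a b inv hL
        have hlenL : L.length = P.length + 2 + S.length := by rw [hL]; simp; omega
        -- fuel bound for the recursive call
        have hb1 := pvAg1Len ms v (PySem.List.pySetD tokens i (a ++ b)) rest
          (PySem.List.pyGetD (if PySem.List.pyGetD nxt (PySem.List.pyGetD nxt i (-1)) (-1) ≠ -1 then
            PySem.List.pySetD prv (PySem.List.pyGetD nxt (PySem.List.pyGetD nxt i (-1)) (-1)) i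
            else prv) i (-1)) i
        have hb2 := pvAg2Len ms v (PySem.List.pySetD tokens i (a ++ b))
          (if (PySem.List.pyGetD (if PySem.List.pyGetD nxt
              (PySem.List.pyGetD nxt i (-1)) (-1) ≠ -1 then
              PySem.List.pySetD prv (PySem.List.pyGetD nxt (PySem.List.pyGetD nxt i (-1)) (-1)) i
              else prv) i (-1)) ≠ -1 then
            (match pvEntry? ms v (PySem.List.pySetD tokens i (a ++ b))
              (PySem.List.pyGetD (if PySem.List.pyGetD nxt
                (PySem.List.pyGetD nxt i (-1)) (-1) ≠ -1 then
                PySem.List.pySetD prv (PySem.List.pyGetD nxt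
                  (PySem.List.pyGetD nxt i (-1)) (-1)) i else prv) i (-1)) i with
             | some e => pvPush rest e | none => rest)
          else rest) rest i
          (PySem.List.pyGetD nxt (PySem.List.pyGetD nxt i (-1)) (-1)) hb1
        have h3 : (P ++ (i, a ++ b) :: S).length = P.length + 1 + S.length := by
          simp only [List.length_append, List.length_cons]
          omega
        have hfuel' : (if PySem.List.pyGetD nxt (PySem.List.pyGetD nxt i (-1)) (-1) ≠ -1 then
            (match pvEntry? ms v (PySem.List.pySetD tokens i (a ++ b)) i
              (PySem.List.pyGetD nxt (PySem.List.pyGetD nxt i (-1)) (-1)) with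
             | some e => pvPush (if (PySem.List.pyGetD (if PySem.List.pyGetD nxt
                (PySem.List.pyGetD nxt i (-1)) (-1) ≠ -1 then
                PySem.List.pySetD prv (PySem.List.pyGetD nxt
                  (PySem.List.pyGetD nxt i (-1)) (-1)) i else prv) i (-1)) ≠ -1 then
                  (match pvEntry? ms v (PySem.List.pySetD tokens i (a ++ b))
                    (PySem.List.pyGetD (if PySem.List.pyGetD nxt
                      (PySem.List.pyGetD nxt i (-1)) (-1) ≠ -1 then
                      PySem.List.pySetD prv (PySem.List.pyGetD nxt
                        (PySem.List.pyGetD nxt i (-1)) (-1)) i else prv) i (-1)) i with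
                   | some e => pvPush rest e | none => rest)
                else rest) e
             | none => (if (PySem.List.pyGetD (if PySem.List.pyGetD nxt
                (PySem.List.pyGetD nxt i (-1)) (-1) ≠ -1 then
                PySem.List.pySetD prv (PySem.List.pyGetD nxt
                  (PySem.List.pyGetD nxt i (-1)) (-1)) i else prv) i (-1)) ≠ -1 then
                  (match pvEntry? ms v (PySem.List.pySetD tokens i (a ++ b))
                    (PySem.List.pyGetD (if PySem.List.pyGetD nxt
                      (PySem.List.pyGetD nxt i (-1)) (-1) ≠ -1 then
                      PySem.List.pySetD prv (PySem.List.pyGetD nxt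
                        (PySem.List.pyGetD nxt i (-1)) (-1)) i else prv) i (-1)) i with
                   | some e => pvPush rest e | none => rest)
                else rest))
          else (if (PySem.List.pyGetD (if PySem.List.pyGetD nxt
                (PySem.List.pyGetD nxt i (-1)) (-1) ≠ -1 then
                PySem.List.pySetD prv (PySem.List.pyGetD nxt
                  (PySem.List.pyGetD nxt i (-1)) (-1)) i else prv) i (-1)) ≠ -1 then
                  (match pvEntry? ms v (PySem.List.pySetD tokens i (a ++ b))
                    (PySem.List.pyGetD (if PySem.List.pyGetD nxt
                      (PySem.List.pyGetD nxt i (-1)) (-1) ≠ -1 then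
                      PySem.List.pySetD prv (PySem.List.pyGetD nxt
                        (PySem.List.pyGetD nxt i (-1)) (-1)) i else prv) i (-1)) i with
                   | some e => pvPush rest e | none => rest)
                else rest)).length + 2 * (P ++ (i, a ++ b) :: S).length ≤ fuel := by
          simp only [List.length_cons] at hfuel
          omega
        have hrec := ih _ _ _ _ _ _ hinv' hfuel'
        have hA : pvALoop ms v (L.length + 1) (L.map Prod.snd)
            = pvALoop ms v ((P ++ (i, a ++ b) :: S).length + 1)
                ((P ++ (i, a ++ b) :: S).map Prod.snd) := by
          rw [pvARound, hfold]
          show pvALoop ms v L.length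
            (PySem.List.slice (L.map Prod.snd) none (some (P.length : Int)) ++
              [PySem.List.pyGetD (L.map Prod.snd) (P.length : Int) "" ++
                PySem.List.pyGetD (L.map Prod.snd) ((P.length : Int) + 1) ""] ++
              PySem.List.slice (L.map Prod.snd) (some ((P.length : Int) + 2)) none) = _
          rw [hL]
          rw [pvSplice P S i (PySem.List.pyGetD nxt i (-1)) a b]
          congr 1
          simp
          omega
        rw [hA]
        exact hrec


-- ---------- the initial state satisfies the invariant ----------

theorem pvFoldAgSorted (ms : List (String × String)) (v : List (String × Int)) (word : List String) :
    ∀ (l : List Int) (init : List (Int × Int × String × String)), init.Pairwise pvKeyLE →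
    (l.foldl (fun ag i => match pvEntry? ms v word i (i + 1) with
      | some e => pvPush ag e | none => ag) init).Pairwise pvKeyLE := by
  intro l
  induction l with
  | nil => intro init h; exact h
  | cons x t ih =>
    intro init h
    rw [List.foldl_cons]
    apply ih
    rcases he : pvEntry? ms v word x (x + 1) with _ | e
    · exact h
    · exact pvPush_pairwise init e h

theorem pvFoldAgMem (ms : List (String × String)) (v : List (String × Int)) (word : List String) :
    ∀ (l : List Int) (init : List (Int × Int × String × String)) (x : Int × Int × String × String),
    (x ∈ l.foldl (fun ag i => match pvEntry? ms v word i (i + 1) with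
      | some e => pvPush ag e | none => ag) init ↔
      x ∈ init ∨ ∃ idx ∈ l, pvEntry? ms v word idx (idx + 1) = some x) := by
  intro l
  induction l with
  | nil => intro init x; simp
  | cons q t ih =>
    intro init x
    rw [List.foldl_cons, ih]
    have hstep : (x ∈ (match pvEntry? ms v word q (q + 1) with
        | some e => pvPush init e | none => init)) ↔
        x ∈ init ∨ pvEntry? ms v word q (q + 1) = some x := by
      rcases he : pvEntry? ms v word q (q + 1) with _ | e
      · simp
      · rw [pvPush_mem]
        constructor
        · rintro (rfl | h)
          · exact Or.inr rfl
          · exact Or.inl h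
        · rintro (h | h)
          · exact Or.inr h
          · exact Or.inl (Option.some.inj h).symm
    rw [hstep]
    constructor
    · rintro (( h | h) | ⟨idx, hidx, hh⟩)
      · exact Or.inl h
      · exact Or.inr ⟨q, List.mem_cons_self, h⟩
      · exact Or.inr ⟨idx, List.mem_cons_of_mem _ hidx, hh⟩
    · rintro (h | ⟨idx, hidx, hh⟩)
      · exact Or.inl (Or.inl h)
      · rcases List.mem_cons.1 hidx with rfl | hidx'
        · exact Or.inl (Or.inr hh)
        · exact Or.inr ⟨idx, hidx', hh⟩

theorem pvFoldAgLen (ms : List (String × String)) (v : List (String × Int)) (word : List String) :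
    ∀ (l : List Int) (init : List (Int × Int × String × String)),
    (l.foldl (fun ag i => match pvEntry? ms v word i (i + 1) with
      | some e => pvPush ag e | none => ag) init).length ≤ init.length + l.length := by
  intro l
  induction l with
  | nil => intro init; simp
  | cons q t ih =>
    intro init
    rw [List.foldl_cons]
    rcases he : pvEntry? ms v word q (q + 1) with _ | e
    · refine le_trans (ih _) ?_
      show init.length + t.length ≤ init.length + (q :: t).length
      simp only [List.length_cons]
      omega
    · refine le_trans (ih _) ?_
      show (pvPush init e).length + t.length ≤ init.length + (q :: t).length
      rw [pvPush_length]
      simp only [List.length_cons]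
      omega

-- membership in the enumerated word
theorem pvEnumGet (word : List String) (k : Nat) (x : Int × String)
    (h : (PySem.List.enumerate word 0)[k]? = some x) :
    x.1 = (k : Int) ∧ word[k]? = some x.2 := by
  rw [PySem.List.getElem?_enumerate] at h
  rcases Option.map_eq_some_iff.1 h with ⟨w, hw, hx⟩
  rw [← hx]
  exact ⟨by simp, by rw [hw]⟩

theorem pvInit (ms : List (String × String)) (v : List (String × Int)) (word : List String) :
    pvInv ms v word.length word
      ((PySem.List.pyRange 0 (word.length : Int) 1).map
        (fun i => if i + 1 < (word.length : Int) then i + 1 else -1))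
      ((PySem.List.pyRange 0 (word.length : Int) 1).map (fun i => i - 1))
      (List.replicate word.length true)
      ((PySem.List.pyRange 0 ((word.length : Int) - 1) 1).foldl
        (fun ag i => match pvEntry? ms v word i (i + 1) with
          | some e => pvPush ag e | none => ag) [])
      (PySem.List.enumerate word 0) := by
  have hmb : ∀ x ∈ PySem.List.enumerate word 0, 0 ≤ x.1 ∧ x.1 < (word.length : Int) := by
    intro x hx
    rcases (PySem.List.mem_enumerate_iff _ _ _).1 hx with ⟨k, hk, rfl⟩
    simp
    omega
  have htok0 : ∀ x ∈ PySem.List.enumerate word 0, PySem.List.pyGetD word x.1 "" = x.2 := by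
    intro x hx
    rcases (PySem.List.mem_enumerate_iff _ _ _).1 hx with ⟨k, hk, rfl⟩
    simp only [zero_add]
    rw [PySem.List.pyGetD_natCast]
    rw [List.getD_eq_getElem _ _ (n := k) hk]
  refine ⟨rfl, by simp, by simp, by simp, ?_, hmb, ?_, ?_, htok0, ?_, ?_, ?_, ?_, ?_, ?_, ?_, ?_⟩
  · -- mono
    have := PySem.List.map_fst_enumerate word (0 : Int)
    rw [this]
    simpa using PySem.List.pairwise_lt_pyRange_one 0 (word.length : Int)
  · -- head0
    intro x T hxe
    rcases word with _ | ⟨c, w'⟩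
    · cases hxe
    · rw [PySem.List.enumerate_cons] at hxe
      injection hxe with h1 _
      rw [← h1]
  · -- nonnil
    intro hpos h
    have := congrArg List.length h
    rw [PySem.List.length_enumerate] at this
    rw [List.length_nil] at this
    omega
  · -- aliveIff
    intro idx h0 hlt
    constructor
    · intro _
      rw [PySem.List.map_fst_enumerate]
      apply (PySem.List.mem_pyRange_one).2
      simpa using ⟨h0, hlt⟩
    · intro _
      rw [pvGetD_nonneg_eq _ _ _ h0]
      rw [List.getD_eq_getElem (List.replicate word.length true) false (n := idx.toNat)
        (by simpa using (by omega : idx.toNat < word.length))]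
      simp
  · -- linkNxt
    intro x y hadj
    rcases hadj with ⟨k, h1, h2⟩
    rcases pvEnumGet word k x h1 with ⟨hx1, _⟩
    rcases pvEnumGet word (k + 1) y h2 with ⟨hy1, hy2⟩
    have hk1 : k + 1 < word.length := by
      obtain ⟨hlt, -⟩ := List.getElem?_eq_some_iff.1 hy2
      omega
    rw [hx1, PySem.List.pyGetD_map_pyRange_of_nonneg _ _ _ _
      (by omega : (0 : Int) ≤ (k : Int)) (by omega : ((k : Int) < (word.length : Int)))]
    rw [if_pos (by omega : ((k : Int) + 1 < (word.length : Int))), hy1]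
    push_cast
    ring
  · -- lastNxt
    intro x hxl
    rw [List.getLast?_eq_getElem?] at hxl
    rw [PySem.List.length_enumerate] at hxl
    rcases pvEnumGet word (word.length - 1) x hxl with ⟨hx1, hx2⟩
    have hpos : 0 < word.length := by
      obtain ⟨hlt, -⟩ := List.getElem?_eq_some_iff.1 hx2
      omega
    rw [hx1, PySem.List.pyGetD_map_pyRange_of_nonneg _ _ _ _
      (by omega : (0 : Int) ≤ ((word.length - 1 : Nat) : Int))
      (by omega : (((word.length - 1 : Nat) : Int) < (word.length : Int)))]
    rw [if_neg (by omega : ¬ (((word.length - 1 : Nat) : Int) + 1 < (word.length : Int)))]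
  · -- linkPrv
    intro x y hadj
    rcases hadj with ⟨k, h1, h2⟩
    rcases pvEnumGet word k x h1 with ⟨hx1, _⟩
    rcases pvEnumGet word (k + 1) y h2 with ⟨hy1, hy2⟩
    have hk1 : k + 1 < word.length := by
      obtain ⟨hlt, -⟩ := List.getElem?_eq_some_iff.1 hy2
      omega
    rw [hy1, PySem.List.pyGetD_map_pyRange_of_nonneg _ _ _ _
      (by omega : (0 : Int) ≤ ((k + 1 : Nat) : Int))
      (by omega : (((k + 1 : Nat) : Int) < (word.length : Int)))]
    rw [hx1]
    push_cast
    ring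
  · -- headPrv
    intro x T hxe
    rcases word with _ | ⟨c, w'⟩
    · cases hxe
    · rw [PySem.List.enumerate_cons] at hxe
      injection hxe with h1 _
      rw [← h1]
      rw [PySem.List.pyGetD_map_pyRange_of_nonneg _ _ _ _
        (le_refl (0 : Int)) (by simp : ((0 : Int) < ((c :: w').length : Int)))]
      norm_num
  · -- agSorted
    exact pvFoldAgSorted ms v word _ [] (by simp)
  · -- agOK
    intro e he
    rcases (pvFoldAgMem ms v word _ [] e).1 he with h | ⟨idx, hidx, hh⟩
    · cases h
    · rcases pvEntry?_shape ms v word idx (idx + 1) e hh with ⟨he2, hco, hg⟩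
      have hidx' := (PySem.List.mem_pyRange_one).1 hidx
      refine ⟨?_, ?_, ?_, ?_⟩
      · rw [he2]; exact hco
      · rw [he2]; simpa using hg
      · rw [he2]; simpa using hidx'.1
      · rw [he2]
        simp only
        omega
  · -- agComplete
    intro x y hadj t hcont hget
    rcases hadj with ⟨k, h1, h2⟩
    rcases pvEnumGet word k x h1 with ⟨hx1, hx2⟩
    rcases pvEnumGet word (k + 1) y h2 with ⟨hy1, hy2⟩
    have hk1 : k + 1 < word.length := by
      obtain ⟨hlt, -⟩ := List.getElem?_eq_some_iff.1 hy2
      omega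
    have hreadx : PySem.List.pyGetD word (k : Int) "" = x.2 := by
      rw [PySem.List.pyGetD_natCast]
      rw [List.getD_eq_getElem _ _ (n := k) (by omega)]
      exact (List.getElem?_eq_some_iff.1 hx2).2
    have hready : PySem.List.pyGetD word ((k : Int) + 1) "" = y.2 := by
      have hc : ((k : Int) + 1) = ((k + 1 : Nat) : Int) := by push_cast; ring
      rw [hc, PySem.List.pyGetD_natCast]
      rw [List.getD_eq_getElem _ _ (n := k + 1) (by omega)]
      exact (List.getElem?_eq_some_iff.1 hy2).2
    have hent : pvEntry? ms v word (k : Int) ((k : Int) + 1) = some (t, (k : Int), x.2, y.2) := by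
      simp only [pvEntry?, hreadx, hready]
      rw [hcont, if_pos rfl, hget]
    apply (pvFoldAgMem ms v word _ [] _).2
    right
    refine ⟨(k : Int), ?_, ?_⟩
    · apply (PySem.List.mem_pyRange_one).2
      constructor
      · omega
      · omega
    · rw [hent, hx1]

-- ===== VERDICT (by name: the statement is the Claim_ definition above) =====
theorem apply_merges_spec : Claim_equal_apply_merges := by
  intro word ms v _
  unfold Spec_apply_merges apply_merges apply_merges_alt
  have hfa := pvFoldAgLen ms v word (PySem.List.pyRange 0 ((word.length : Int) - 1) 1) []
  have hlr : (PySem.List.pyRange 0 ((word.length : Int) - 1) 1).length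
      = (((word.length : Int) - 1) - 0).toNat := PySem.List.length_pyRange_one 0 _
  have hfuel0 : ((PySem.List.pyRange 0 ((word.length : Int) - 1) 1).foldl
      (fun ag i => match pvEntry? ms v word i (i + 1) with
        | some e => pvPush ag e | none => ag) []).length
      + 2 * (PySem.List.enumerate word (0 : Int)).length ≤ 3 * word.length + 3 := by
    rw [PySem.List.length_enumerate]
    simp only [List.length_nil] at hfa
    omega
  have hsim := pvSim ms v word.length (3 * word.length + 3) word
    ((PySem.List.pyRange 0 (word.length : Int) 1).map
      (fun i => if i + 1 < (word.length : Int) then i + 1 else -1))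
    ((PySem.List.pyRange 0 (word.length : Int) 1).map (fun i => i - 1))
    (List.replicate word.length true)
    ((PySem.List.pyRange 0 ((word.length : Int) - 1) 1).foldl
      (fun ag i => match pvEntry? ms v word i (i + 1) with
        | some e => pvPush ag e | none => ag) [])
    (PySem.List.enumerate word 0)
    (pvInit ms v word) hfuel0
  rw [PySem.List.length_enumerate] at hsim
  have hms : (PySem.List.enumerate word (0 : Int)).map Prod.snd = word :=
    PySem.List.map_snd_enumerate word (0 : Int)
  rw [hms] at hsim
  exact hsim.symm
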